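-- pv_equiv track=rewrite | github.com/justgotothedesk/Algorithm_Study | Programmers/퍼즐 조각 채우기.py | solution
-- ===== SOURCE A (Python) =====
-- from collections import deque
--
-- def rotate(board):
--     row = len(board)
--     col = len(board[0])
--     result = [[0]*row for _ in range(col)]
--     count = 0
--
--     for i in range(row):
--         for j in range(col):
--             if board[i][j] == 1:
--                 count += 1
--             result[j][row-i-1] = board[i][j]
--
--     return count, result
--
-- def compact(board):
--     x, y = zip(*board)
--     r = max(x)-min(x)+1
--     c = max(y)-min(y)+1
--     result = [[0]*c for _ in range(r)]
--
--     for i, j in board: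
--         i -= min(x)
--         j -= min(y)
--         result[i][j] = 1
--
--     return result
--
-- def bfs(board, value):
--     row = len(board)
--     col = len(board[0])
--     visited = [[False]*col for _ in range(row)]
--     q = deque()
--     result = []
--     dx = [1, -1, 0, 0]
--     dy = [0, 0, 1, -1]
--
--     for i in range(row):
--         for j in range(col):
--             if board[i][j] == value and not visited[i][j]:
--                 temp = [[i, j]]
--                 visited[i][j] = True
--                 q.append([i, j])
--                 while q:
--                     x, y = q.popleft()
--                     for k in range(4):
--                         nx = x+dx[k]
--                         ny = y+dy[k]
--                         if 0 <= nx < row and 0 <= ny < col and not visited[nx][ny] and board[nx][ny] == value: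
--                             q.append([nx, ny])
--                             visited[nx][ny] = True
--                             temp.append([nx, ny])
--                 result.append(temp)
--
--     return result
--
-- def solution(game_board, table):
--     answer = 0
--     dd = []
--     empty_blocks = bfs(game_board, 0)
--     puzzles = bfs(table, 1)
--
--     for empty in empty_blocks:
--         filled = False
--         compact_empty = compact(empty)
--
--         for puzzle_origin in puzzles:
--             if filled == True:
--                 break
--             puzzle = compact(puzzle_origin)
--             for i in range(4):
--                 count, puzzle = rotate(puzzle) #count, rotate_puzzle = rotate(puzzle)로 하면 답이 틀림
--                 if compact_empty == puzzle:
--                     answer += count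
--                     puzzles.remove(puzzle_origin)
--                     filled = True
--                     break
--
--     return answer
-- ===== SOURCE B (Python) =====
-- # B: counts shapes instead of greedy matching, and never builds grids for the matching:
-- # each region's cell set is canonicalized directly (rotate coordinates (i,j)->(j,-i) four
-- # times, shift to the origin, sort; take the lexicographic minimum), and the answer is
-- # sum over canonical keys of min(#empty regions, #puzzles) * number of cells of the key.
-- from collections import deque, Counter
--
-- def bfs(board, value):
--     row = len(board)
--     col = len(board[0])
--     visited = [[False]*col for _ in range(row)]
--     q = deque()
--     result = []
--     dx = [1, -1, 0, 0]
--     dy = [0, 0, 1, -1]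
--
--     for i in range(row):
--         for j in range(col):
--             if board[i][j] == value and not visited[i][j]:
--                 temp = [[i, j]]
--                 visited[i][j] = True
--                 q.append([i, j])
--                 while q:
--                     x, y = q.popleft()
--                     for k in range(4):
--                         nx = x+dx[k]
--                         ny = y+dy[k]
--                         if 0 <= nx < row and 0 <= ny < col and not visited[nx][ny] and board[nx][ny] == value:
--                             q.append([nx, ny])
--                             visited[nx][ny] = True
--                             temp.append([nx, ny])
--                 result.append(temp)
--
--     return result
--
-- def canon(cells):
--     # canonical key of a cell set: lexicographic minimum over the four rotations of the
--     # origin-shifted, sorted coordinate list (no grid is ever materialized)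
--     pts = {(i, j) for i, j in cells}
--     best = None
--     for _ in range(4):
--         pts = {(j, -i) for i, j in pts}
--         mi = min(p[0] for p in pts)
--         mj = min(p[1] for p in pts)
--         cur = sorted([p[0] - mi, p[1] - mj] for p in pts)
--         if best is None or cur < best:
--             best = cur
--     return tuple(map(tuple, best))
--
-- def solution(game_board, table):
--     empty_counts = Counter(canon(e) for e in bfs(game_board, 0))
--     puzzle_counts = Counter(canon(p) for p in bfs(table, 1))
--     return sum(min(empty_counts[k], c) * len(k) for k, c in puzzle_counts.items())
-- ===== Notes on version B (the rewrite author's own statement) =====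
-- stated objective: alternative
-- what changed: A's greedy matching loop that rescans the remaining puzzle list and recomputes each puzzle's compacted grid and four grid rotations for every empty region is replaced by grid-free canonicalization of each region's cell set (rotate coordinates (i,j)->(j,-i), shift to the origin, sort, take the lexicographic minimum of the four rotations) followed by Counter lookup, summing min(#empty,#puzzle)*size per canonical key.
import Mathlib
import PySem

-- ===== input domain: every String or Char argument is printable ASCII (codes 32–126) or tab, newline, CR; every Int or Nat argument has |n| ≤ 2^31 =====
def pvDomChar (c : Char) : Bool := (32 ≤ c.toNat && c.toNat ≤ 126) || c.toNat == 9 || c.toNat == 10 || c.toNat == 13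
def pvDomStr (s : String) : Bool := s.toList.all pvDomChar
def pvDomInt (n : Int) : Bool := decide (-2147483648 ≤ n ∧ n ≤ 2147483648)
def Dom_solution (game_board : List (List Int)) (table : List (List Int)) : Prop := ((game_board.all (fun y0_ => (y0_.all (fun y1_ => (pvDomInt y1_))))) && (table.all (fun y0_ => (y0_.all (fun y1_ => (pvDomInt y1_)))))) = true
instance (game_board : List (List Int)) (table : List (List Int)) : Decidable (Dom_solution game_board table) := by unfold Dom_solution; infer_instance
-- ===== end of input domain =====

-- B replaces A's greedy matching loop — which, for every empty region, rescans the list of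
-- remaining puzzles and recomputes each puzzle's compacted grid and four grid rotations —
-- by grid-free canonical counting: each region's CELL SET is canonicalized directly
-- (rotate coordinates (i,j)->(j,-i) four times, shift to the origin, sort, take the
-- lexicographic minimum), and the answer is the sum over canonical keys of
-- min(#empty regions, #puzzles) * number of cells. Only the connected-region extraction
-- (bfs) is common to the two programs. Python's [i, j] cell lists are ported as pairs
-- (Int × Int) on the A side; B's Python works with int 2-tuples compared lexicographically,
-- which are ported as 2-element `List Int` values (Mathlib's order on pairs is the pointwise
-- one, Lean's `List Int` order is Python's lexicographic tuple order). board[i][j] indexing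
-- is ported with pyGetD defaults, exact on the indices these programs reach (always in range
-- for inputs satisfying Pre_solution); the bfs while-loop carries fuel that strictly exceeds
-- its possible iteration count (each iteration pops one of at most row*col+1 ever-enqueued
-- cells, each enqueue marks a fresh visited cell).

-- ===== PORT A =====
/-- board[i][j] (indices always in range where used) -/
def cellGet (b : List (List Int)) (i j : Int) : Int :=
  PySem.List.pyGetD (PySem.List.pyGetD b i []) j 0

/-- visited[i][j] -/
def visGet (v : List (List Bool)) (i j : Int) : Bool :=
  PySem.List.pyGetD (PySem.List.pyGetD v i []) j false

/-- b[i][j] = x -/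
def gsetI (b : List (List Int)) (i j : Int) (x : Int) : List (List Int) :=
  PySem.List.pySetD b i (PySem.List.pySetD (PySem.List.pyGetD b i []) j x)

/-- v[i][j] = x (Bool grid) -/
def gsetB (b : List (List Bool)) (i j : Int) (x : Bool) : List (List Bool) :=
  PySem.List.pySetD b i (PySem.List.pySetD (PySem.List.pyGetD b i []) j x)

/-- rotate(board) -/
def rotateP (board : List (List Int)) : Int × List (List Int) :=
  let row : Int := PySem.List.len board
  let col : Int := PySem.List.len (board.headD [])
  let result := (PySem.List.pyRange 0 col 1).map (fun _ => List.replicate row.toNat (0 : Int))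
  (PySem.List.pyRange 0 row 1).foldl (fun st i =>
    (PySem.List.pyRange 0 col 1).foldl (fun st j =>
      (if cellGet board i j = 1 then st.1 + 1 else st.1,
       gsetI st.2 j (row - i - 1) (cellGet board i j))) st) (0, result)

/-- compact(board) (cells nonempty wherever called, so zip/max/min do not raise) -/
def compactP (cells : List (Int × Int)) : List (List Int) :=
  let xs := cells.map (·.1)
  let ys := cells.map (·.2)
  let minX := PySem.List.minD xs id 0
  let maxX := PySem.List.maxD xs id 0
  let minY := PySem.List.minD ys id 0
  let maxY := PySem.List.maxD ys id 0
  let r : Int := maxX - minX + 1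
  let c : Int := maxY - minY + 1
  let result := (PySem.List.pyRange 0 r 1).map (fun _ => List.replicate c.toNat (0 : Int))
  cells.foldl (fun res ij => gsetI res (ij.1 - minX) (ij.2 - minY) 1) result

/-- the `while q:` loop of bfs; fuel strictly exceeds the number of pops -/
def bfsWhile (board : List (List Int)) (value row col : Int) :
    Nat → List (Int × Int) → List (List Bool) → List (Int × Int) →
    List (List Bool) × List (Int × Int)
  | 0, _, vis, temp => (vis, temp)
  | fuel+1, q, vis, temp =>
    match q with
    | [] => (vis, temp)
    | xy :: q' =>
      let st := ([((1:Int),(0:Int)), (-1,0), (0,1), (0,-1)]).foldl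
        (fun (st : List (Int × Int) × List (List Bool) × List (Int × Int)) d =>
          let nx := xy.1 + d.1
          let ny := xy.2 + d.2
          if 0 ≤ nx ∧ nx < row ∧ 0 ≤ ny ∧ ny < col ∧
              visGet st.2.1 nx ny = false ∧ cellGet board nx ny = value then
            (st.1 ++ [(nx, ny)], gsetB st.2.1 nx ny true, st.2.2 ++ [(nx, ny)])
          else st) (q', vis, temp)
      bfsWhile board value row col fuel st.1 st.2.1 st.2.2

/-- bfs(board, value) -/
def bfsP (board : List (List Int)) (value : Int) : List (List (Int × Int)) :=
  let row : Int := PySem.List.len board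
  let col : Int := PySem.List.len (board.headD [])
  let vis0 := (PySem.List.pyRange 0 row 1).map (fun _ => List.replicate col.toNat false)
  let st := (PySem.List.pyRange 0 row 1).foldl
    (fun (st : List (List Bool) × List (List (Int × Int))) i =>
      (PySem.List.pyRange 0 col 1).foldl (fun st j =>
        if cellGet board i j = value ∧ visGet st.1 i j = false then
          let vis1 := gsetB st.1 i j true
          let w := bfsWhile board value row col (row.toNat * col.toNat + 2) [(i, j)] vis1 [(i, j)]
          (w.1, st.2 ++ [w.2])
        else st) st) (vis0, [])
  st.2

/-- A's inner `for i in range(4)` rotation loop -/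
def rotTry (ce : List (List Int)) : List (List Int) → Nat → Option Int
  | _, 0 => none
  | puzzle, k+1 =>
    let cp := rotateP puzzle
    if ce = cp.2 then some cp.1 else rotTry ce cp.2 k

/-- A's scan over the (current) puzzles list: first match wins -/
def scanPz (ce : List (List Int)) : List (List (Int × Int)) → Option (Int × List (Int × Int))
  | [] => none
  | p :: ps =>
    match rotTry ce (compactP p) 4 with
    | some c => some (c, p)
    | none => scanPz ce ps

def solution (game_board : List (List Int)) (table : List (List Int)) : Int :=
  ((bfsP game_board 0).foldl (fun (st : Int × List (List (Int × Int))) empt =>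
    let ce := compactP empt
    match scanPz ce st.2 with
    | some cp => (st.1 + cp.1, (PySem.List.remove? st.2 cp.2).getD st.2)
    | none => st) (0, bfsP table 1)).1

-- ===== PORT B =====
/-- one pass of Source B's canon loop: rotate the point set, then build the shifted sorted
    coordinate list (cells are 2-element `List Int`, Python's int 2-tuples) -/
def canonBStep (pts : PySem.Set (List Int)) : PySem.Set (List Int) × List (List Int) :=
  let pts' : PySem.Set (List Int) :=
    PySem.Set.ofList (pts.map (fun p => [p.getD 1 0, -(p.getD 0 0)]))
  let mi := PySem.List.minD (pts'.map (fun p => p.getD 0 0)) id 0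
  let mj := PySem.List.minD (pts'.map (fun p => p.getD 1 0)) id 0
  (pts', PySem.List.sorted (pts'.map (fun p => [p.getD 0 0 - mi, p.getD 1 0 - mj]))
    (fun x => x) false)

/-- Source B canon: running lexicographic minimum over the four rotations -/
def canonBLoop : PySem.Set (List Int) → Option (List (List Int)) → Nat → Option (List (List Int))
  | _, best, 0 => best
  | pts, best, k+1 =>
    let s := canonBStep pts
    let best' := match best with
      | none => some s.2
      | some b => if s.2 < b then some s.2 else some b
    canonBLoop s.1 best' k

/-- canon(cells) of Source B -/
def canonB (cells : List (Int × Int)) : List (List Int) :=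
  (canonBLoop (PySem.Set.ofList (cells.map (fun p => [p.1, p.2]))) none 4).getD []

def solution_alt (game_board : List (List Int)) (table : List (List Int)) : Int :=
  let empty_counts := PySem.Dict.counter ((bfsP game_board 0).map canonB)
  let puzzle_counts := PySem.Dict.counter ((bfsP table 1).map canonB)
  puzzle_counts.items.foldl
    (fun acc kc => acc + min (empty_counts.getD kc.1 0) kc.2 * PySem.List.len kc.1) 0

-- ===== PRECONDITION & SPEC =====
-- Pre_ excludes exactly the inputs on which Python A raises: an empty board (board[0] is an
-- IndexError) or a row shorter than the first row (board[i][j] is an IndexError).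
def Pre_solution (game_board : List (List Int)) (table : List (List Int)) : Prop :=
  game_board ≠ [] ∧ table ≠ [] ∧
  (∀ r ∈ game_board, (game_board.headD []).length ≤ r.length) ∧
  (∀ r ∈ table, (table.headD []).length ≤ r.length)
instance (game_board : List (List Int)) (table : List (List Int)) :
    Decidable (Pre_solution game_board table) := by unfold Pre_solution; infer_instance

def pvWitness_solution : List (List Int) × List (List Int) :=
  ([[1, 0], [0, 1]], [[0, 1], [1, 0]])

def Spec_solution (game_board : List (List Int)) (table : List (List Int)) (out : Int) : Prop := out = solution_alt game_board table
instance (game_board : List (List Int)) (table : List (List Int)) (out : Int) : Decidable (Spec_solution game_board table out) := by unfold Spec_solution; infer_instance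

-- ===== CLAIM (what is proved, stated in full; the proofs are below) =====
def Claim_equal_solution : Prop := ∀ (game_board : List (List Int)) (table : List (List Int)), Dom_solution game_board table → Pre_solution game_board table → Spec_solution game_board table (solution game_board table)

-- ===== LEMMAS AND PROOFS =====

/-- sum(row.count(1)) of a grid -/
def onesP (g : List (List Int)) : Int :=
  (g.map (fun r => (PySem.List.count r 1 : Int))).sum

def ggetN (g : List (List Int)) (i j : Nat) : Int := (g.getD i []).getD j 0

def RectH (g : List (List Int)) : Prop := ∀ row ∈ g, row.length = (g.headD []).length

def rotG (g : List (List Int)) : List (List Int) :=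
  (List.range (g.headD []).length).map (fun j =>
    (List.range g.length).map (fun k => ggetN g (g.length - 1 - k) j))

lemma cellGet_cast (b : List (List Int)) (i j : Nat) :
    cellGet b (i : Int) (j : Int) = ggetN b i j := by
  simp [cellGet, ggetN, PySem.List.pyGetD_natCast]

lemma getD_map_range' {α : Type} [Inhabited α] (n m : Nat) (f : Nat → α) (d : α) (h : m < n) :
    ((List.range n).map f).getD m d = f m := by
  rw [List.getD_eq_getElem _ _ (by simpa using h)]
  simp

lemma set_map_range {α : Type} (n m : Nat) (f : Nat → α) (x : α) (hm : m < n) :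
    ((List.range n).map f).set m x = (List.range n).map (fun j => if j = m then x else f j) := by
  apply List.ext_getElem
  · simp
  · intro i h1 h2
    simp only [List.getElem_set, List.getElem_map, List.getElem_range]
    by_cases h : i = m
    · simp [h]
    · rw [if_neg (fun hh => h hh.symm), if_neg h]

lemma gsetI_cast (b : List (List Int)) (j q : Nat) (x : Int) :
    gsetI b (j : Int) (q : Int) x = b.set j ((b.getD j []).set q x) := by
  simp [gsetI, PySem.List.pySetD_natCast, PySem.List.pyGetD_natCast]

-- the inner `for j in range(col)` loop of rotate

lemma inner_rot (g : List (List Int)) (r c i : Nat) (hr : g.length = r)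
    (hc : ∀ row ∈ g, row.length = c) (hi : i < r) :
    ∀ (m : Nat), m ≤ c → ∀ (cnt : Int) (f : Nat → List Int),
    (List.range m).foldl
      (fun st j => (if ggetN g i j = 1 then st.1 + 1 else st.1,
                    gsetI st.2 (j : Int) ((r : Int) - (i : Int) - 1) (ggetN g i j)))
      (cnt, (List.range c).map f)
    = (cnt + (((g.getD i []).take m).count 1 : Int),
       (List.range c).map (fun j => if j < m then (f j).set (r - 1 - i) (ggetN g i j) else f j)) := by
  intro m
  induction m with
  | zero => intro _ cnt f; simp
  | succ m ih =>
    intro _hm cnt f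
    rw [List.range_succ, List.foldl_append]
    rw [ih (by omega) cnt f]
    simp only [List.foldl_cons, List.foldl_nil]
    have hcast : ((r : Int) - (i : Int) - 1) = ((r - 1 - i : Nat) : Int) := by
      omega
    rw [hcast, gsetI_cast]
    have hrowi : (g.getD i []).length = c := by
      have : i < g.length := by omega
      rw [List.getD_eq_getElem _ _ this]
      exact hc _ (List.getElem_mem this)
    rw [getD_map_range' c m _ [] (by omega)]
    simp only [if_neg (lt_irrefl m)]
    rw [set_map_range c m _ _ (by omega)]
    rw [Prod.mk.injEq]
    refine ⟨?_, ?_⟩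
    · -- count component
      have hlt : m < (g.getD i []).length := by omega
      have htake : (g.getD i []).take (m+1) = (g.getD i []).take m ++ [(g.getD i []).getD m 0] := by
        have h2 : (g.getD i [])[m]? = some ((g.getD i []).getD m 0) := by
          rw [List.getElem?_eq_getElem hlt, List.getD_eq_getElem _ _ hlt]
        rw [List.take_add_one, h2]
        rfl
      rw [htake, List.count_append]
      have hgg : ggetN g i m = (g.getD i []).getD m 0 := rfl
      by_cases h1 : ggetN g i m = 1
      · rw [if_pos h1]
        have hone : List.count (1:Int) [(g.getD i []).getD m 0] = 1 := by
          rw [hgg] at h1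
          rw [h1]
          rfl
        rw [hone]
        push_cast
        ring
      · rw [if_neg h1]
        have hzero : List.count (1:Int) [(g.getD i []).getD m 0] = 0 := by
          rw [hgg] at h1
          rw [List.count_singleton]
          simp only [beq_iff_eq]
          exact if_neg (fun h => h1 (by omega))
        rw [hzero]
        push_cast
        ring
    · -- grid component
      apply List.map_congr_left
      intro j hj
      by_cases h1 : j = m
      · subst h1
        simp
      · rw [if_neg h1]
        by_cases h2 : j < m
        · rw [if_pos h2, if_pos (by omega)]
        · rw [if_neg h2, if_neg (by omega)]

lemma pyRange_natCast_list (n : Nat) :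
    PySem.List.pyRange 0 (n : Int) 1 = (List.range n).map (fun k : Nat => (k : Int)) := by
  have h3 : ((n : Int) - 0) = (n : Int) := by ring
  rw [PySem.List.pyRange_one, h3, Int.toNat_natCast]
  exact List.map_congr_left (fun k _ => by omega)

lemma outer_rot (g : List (List Int)) (r c : Nat) (hr : g.length = r)
    (hc : ∀ row ∈ g, row.length = c) :
    ∀ t, t ≤ r →
    (List.range t).foldl
      (fun st i => (List.range c).foldl
        (fun st j => (if ggetN g i j = 1 then st.1 + 1 else st.1,
                      gsetI st.2 (j : Int) ((r : Int) - (i : Int) - 1) (ggetN g i j))) st)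
      (0, (List.range c).map (fun _ => List.replicate r (0 : Int)))
    = ( ((g.take t).map (fun row => (List.count 1 row : Int))).sum,
        (List.range c).map (fun j => (List.range r).map
          (fun k => if r - t ≤ k then ggetN g (r - 1 - k) j else 0)) ) := by
  intro t
  induction t with
  | zero =>
    intro _
    simp only [List.range_zero, List.foldl_nil, List.take_zero, List.map_nil, List.sum_nil]
    rw [Prod.mk.injEq]
    refine ⟨rfl, ?_⟩
    apply List.map_congr_left
    intro j _
    apply List.ext_getElem
    · simp
    · intro k h1 h2
      simp only [List.getElem_replicate, List.getElem_map, List.getElem_range]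
      rw [if_neg (by simp at h1; omega)]
  | succ t ih =>
    intro ht
    rw [List.range_succ, List.foldl_append, ih (by omega), List.foldl_cons, List.foldl_nil]
    rw [inner_rot g r c t hr hc (by omega) c (le_refl c)]
    have hrow : (g.getD t []).length = c := by
      have hlt : t < g.length := by omega
      rw [List.getD_eq_getElem _ _ hlt]
      exact hc _ (List.getElem_mem hlt)
    rw [Prod.mk.injEq]
    refine ⟨?_, ?_⟩
    · -- counts
      have hlt : t < g.length := by omega
      have h2 : g[t]? = some (g.getD t []) := by
        rw [List.getElem?_eq_getElem hlt, List.getD_eq_getElem _ _ hlt]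
      rw [List.take_add_one, h2]
      simp only [Option.toList_some, List.map_append, List.sum_append, List.map_cons,
        List.map_nil, List.sum_cons, List.sum_nil]
      rw [List.take_of_length_le (le_of_eq hrow)]
      ring
    · -- grid
      apply List.map_congr_left
      intro j hj
      rw [if_pos (List.mem_range.mp hj)]
      rw [set_map_range r (r - 1 - t) _ _ (by omega)]
      apply List.map_congr_left
      intro k hk
      have hkr : k < r := List.mem_range.mp hk
      by_cases h1 : k = r - 1 - t
      · rw [if_pos h1, if_pos (by omega)]
        have : r - 1 - k = t := by omega
        rw [this]
      · rw [if_neg h1]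
        by_cases h2 : r - t ≤ k
        · rw [if_pos h2, if_pos (by omega)]
        · rw [if_neg h2, if_neg (by omega)]

lemma rotateP_eq (g : List (List Int)) (hrect : RectH g) :
    rotateP g = (onesP g, rotG g) := by
  set r := g.length with hrdef
  set c := (g.headD []).length with hcdef
  unfold rotateP
  simp only [PySem.List.len_eq, pyRange_natCast_list, List.foldl_map, List.map_map,
    Int.toNat_natCast]
  have hcell : ∀ i j : Nat, cellGet g (i : Int) (j : Int) = ggetN g i j := cellGet_cast g
  have hmain := outer_rot g r c rfl (fun row h => hrect row h) r (le_refl r)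
  rw [show ((g.length : Int)) = ((r : Int)) from rfl]
  convert hmain using 2
  · funext st i
    congr 1
    funext st j
    rw [cellGet_cast]
  · rw [List.take_length]
    rfl
  · unfold rotG
    apply List.map_congr_left
    intro j _
    apply List.map_congr_left
    intro k hk
    rw [if_pos (by omega)]

def Good (g : List (List Int)) : Prop :=
  RectH g ∧ g ≠ [] ∧ (g.headD []).length ≠ 0

lemma headD_eq_getD_zero {α : Type} (l : List α) (d : α) : l.headD d = l.getD 0 d := by
  cases l <;> rfl

lemma length_rotG (g : List (List Int)) : (rotG g).length = (g.headD []).length := by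
  simp [rotG]

lemma headD_rotG (g : List (List Int)) (hc : (g.headD []).length ≠ 0) :
    ((rotG g).headD []).length = g.length := by
  rw [headD_eq_getD_zero]
  unfold rotG
  rw [getD_map_range' _ 0 _ [] (by omega)]
  simp

lemma RectH_rotG (g : List (List Int)) : RectH (rotG g) := by
  intro row hrow
  obtain ⟨j, hj, rfl⟩ := List.mem_map.mp hrow
  have hc : (g.headD []).length ≠ 0 := by
    have := List.mem_range.mp hj
    omega
  rw [headD_rotG g hc]
  simp

lemma good_rotG {g : List (List Int)} (h : Good g) : Good (rotG g) := by
  obtain ⟨h1, h2, h3⟩ := h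
  refine ⟨RectH_rotG g, ?_, ?_⟩
  · intro hnil
    have hlen := length_rotG g
    rw [hnil] at hlen
    exact h3 (by simpa using hlen.symm)
  · rw [headD_rotG g h3]
    intro h0
    exact h2 (List.length_eq_zero_iff.mp h0)

lemma ggetN_rotG (g : List (List Int)) {j k : Nat} (hj : j < (g.headD []).length)
    (hk : k < g.length) :
    ggetN (rotG g) j k = ggetN g (g.length - 1 - k) j := by
  unfold rotG ggetN
  rw [getD_map_range' _ j _ [] hj, getD_map_range' _ k _ 0 hk]

lemma grid_ext {g₁ g₂ : List (List Int)} (h₁ : RectH g₁) (h₂ : RectH g₂)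
    (hl : g₁.length = g₂.length) (hh : (g₁.headD []).length = (g₂.headD []).length)
    (hcell : ∀ i j : Nat, i < g₁.length → j < (g₁.headD []).length → ggetN g₁ i j = ggetN g₂ i j) :
    g₁ = g₂ := by
  apply List.ext_getElem hl
  intro i hi1 hi2
  have hr1 : g₁[i].length = (g₁.headD []).length := h₁ _ (List.getElem_mem hi1)
  have hr2 : g₂[i].length = (g₂.headD []).length := h₂ _ (List.getElem_mem hi2)
  apply List.ext_getElem (by omega)
  intro j hj1 hj2
  have := hcell i j hi1 (by omega)
  unfold ggetN at this
  rw [List.getD_eq_getElem _ _ hi1, List.getD_eq_getElem _ _ hi2] at this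
  rw [List.getD_eq_getElem _ _ hj1, List.getD_eq_getElem _ _ (by omega : j < g₂[i].length)] at this
  exact this

lemma rot4 {g : List (List Int)} (h : Good g) :
    rotG (rotG (rotG (rotG g))) = g := by
  obtain ⟨hrect, hne, hcne⟩ := h
  set r := g.length with hr
  set c := (g.headD []).length with hc
  have hrne : r ≠ 0 := fun h0 => hne (List.length_eq_zero_iff.mp h0)
  have hg1 : Good (rotG g) := good_rotG ⟨hrect, hne, hcne⟩
  have hg2 : Good (rotG (rotG g)) := good_rotG hg1
  have hg3 : Good (rotG (rotG (rotG g))) := good_rotG hg2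
  have hg4 : Good (rotG (rotG (rotG (rotG g)))) := good_rotG hg3
  have l1 : (rotG g).length = c := length_rotG g
  have h1 : ((rotG g).headD []).length = r := headD_rotG g hcne
  have l2 : (rotG (rotG g)).length = r := by rw [length_rotG, h1]
  have h2 : ((rotG (rotG g)).headD []).length = c := by rw [headD_rotG _ (by omega), l1]
  have l3 : (rotG (rotG (rotG g))).length = c := by rw [length_rotG, h2]
  have h3 : ((rotG (rotG (rotG g))).headD []).length = r := by rw [headD_rotG _ (by omega), l2]
  have l4 : (rotG (rotG (rotG (rotG g)))).length = r := by rw [length_rotG, h3]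
  have h4 : ((rotG (rotG (rotG (rotG g)))).headD []).length = c := by
    rw [headD_rotG _ (by omega), l3]
  have c1 : ∀ x y : Nat, x < c → y < r → ggetN (rotG g) x y = ggetN g (r - 1 - y) x := by
    intro x y hx hy
    exact ggetN_rotG g hx hy
  have c2 : ∀ x y : Nat, x < r → y < c →
      ggetN (rotG (rotG g)) x y = ggetN g (r - 1 - x) (c - 1 - y) := by
    intro x y hx hy
    have := ggetN_rotG (rotG g) (j := x) (k := y) (by omega) (by omega)
    rw [l1] at this
    rw [this, c1 (c - 1 - y) x (by omega) hx]
  have c3 : ∀ x y : Nat, x < c → y < r →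
      ggetN (rotG (rotG (rotG g))) x y = ggetN g y (c - 1 - x) := by
    intro x y hx hy
    have := ggetN_rotG (rotG (rotG g)) (j := x) (k := y) (by omega) (by omega)
    rw [l2] at this
    rw [this, c2 (r - 1 - y) x (by omega) hx]
    congr 1
    omega
  have c4 : ∀ x y : Nat, x < r → y < c →
      ggetN (rotG (rotG (rotG (rotG g)))) x y = ggetN g x y := by
    intro x y hx hy
    have := ggetN_rotG (rotG (rotG (rotG g))) (j := x) (k := y) (by omega) (by omega)
    rw [l3] at this
    rw [this, c3 (c - 1 - y) x (by omega) hx]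
    congr 1
    omega
  exact grid_ext hg4.1 hrect (by omega) (by rw [h4]) (fun i j hi hj => c4 i j (by omega) (by rw [h4] at hj; omega))

lemma count1_int (l : List Int) :
    (List.count 1 l : Int) = ∑ j ∈ Finset.range l.length, (if l.getD j 0 = 1 then (1:Int) else 0) := by
  induction l with
  | nil => simp
  | cons x xs ih =>
    rw [List.count_cons, List.length_cons, Finset.sum_range_succ']
    push_cast
    rw [ih]
    have h0 : (x :: xs).getD 0 0 = x := rfl
    have hs : ∀ j : Nat, (x :: xs).getD (j+1) 0 = xs.getD j 0 := fun j => rfl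
    simp only [h0, hs]
    by_cases hx : x = 1
    · simp [hx]
    · have : (x == 1) = false := by simp [hx]
      simp [this, hx]

lemma sum_map_getD (l : List (List Int)) (f : List Int → Int) :
    (l.map f).sum = ∑ i ∈ Finset.range l.length, f (l.getD i []) := by
  induction l with
  | nil => simp
  | cons x xs ih =>
    rw [List.map_cons, List.sum_cons, List.length_cons, Finset.sum_range_succ']
    have h0 : (x :: xs).getD 0 [] = x := rfl
    have hs : ∀ j : Nat, (x :: xs).getD (j+1) [] = xs.getD j [] := fun j => rfl
    simp only [h0, hs]
    rw [ih]
    ring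

lemma ones_rotG (g : List (List Int)) (hrect : RectH g) :
    onesP (rotG g) = onesP g := by
  set r := g.length with hr
  set c := (g.headD []).length with hc
  have hones : ∀ h : List (List Int), onesP h = (h.map (fun row => (List.count 1 row : Int))).sum := by
    intro h
    unfold onesP
    congr 1
  rw [hones, hones, sum_map_getD, sum_map_getD, length_rotG]
  have hcount : ∀ j, j < c → (List.count 1 ((rotG g).getD j []) : Int)
      = ∑ k ∈ Finset.range r, (if ggetN g (r - 1 - k) j = 1 then (1:Int) else 0) := by
    intro j hj
    have hrow : (rotG g).getD j [] = (List.range r).map (fun k => ggetN g (r - 1 - k) j) := by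
      unfold rotG
      rw [getD_map_range' _ j _ [] hj]
    rw [hrow, count1_int]
    simp only [List.length_map, List.length_range]
    apply Finset.sum_congr rfl
    intro k hk
    rw [getD_map_range' _ k _ 0 (Finset.mem_range.mp hk)]
  have hcount2 : ∀ i, i < r → (List.count 1 (g.getD i []) : Int)
      = ∑ j ∈ Finset.range c, (if ggetN g i j = 1 then (1:Int) else 0) := by
    intro i hi
    rw [count1_int]
    have hrl : (g.getD i []).length = c := by
      rw [List.getD_eq_getElem _ _ hi]
      exact hrect _ (List.getElem_mem hi)
    rw [hrl]
    rfl
  rw [Finset.sum_congr rfl (fun j hj => hcount j (Finset.mem_range.mp hj))]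
  rw [Finset.sum_congr rfl (fun i hi => hcount2 i (Finset.mem_range.mp hi))]
  rw [Finset.sum_congr rfl
    (fun j _ => Finset.sum_range_reflect (fun k => if ggetN g k j = 1 then (1:Int) else 0) r)]
  exact Finset.sum_comm

def Rn : Nat → List (List Int) → List (List Int)
  | 0, g => g
  | n+1, g => rotG (Rn n g)

lemma Rn_add (a b : Nat) (g : List (List Int)) : Rn (a + b) g = Rn a (Rn b g) := by
  induction a with
  | zero => rw [Nat.zero_add]; rfl
  | succ a ih => rw [show a + 1 + b = (a + b) + 1 from by omega]; simp [Rn, ih]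

lemma good_Rn {g : List (List Int)} (h : Good g) (n : Nat) : Good (Rn n g) := by
  induction n with
  | zero => exact h
  | succ n ih => exact good_rotG ih

lemma Rn4_eq {g : List (List Int)} (h : Good g) : Rn 4 g = g := by
  show rotG (rotG (rotG (rotG g))) = g
  exact rot4 h

lemma ones_Rn {g : List (List Int)} (h : Good g) (n : Nat) : onesP (Rn n g) = onesP g := by
  induction n with
  | zero => rfl
  | succ n ih =>
    show onesP (rotG (Rn n g)) = onesP g
    rw [ones_rotG _ (good_Rn h n).1, ih]

lemma Rn_period {g : List (List Int)} (h : Good g) (k : Nat) : Rn (k + 4) g = Rn k g := by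
  rw [Rn_add, Rn4_eq h]

def orbit (g : List (List Int)) : List (List (List Int)) := [Rn 1 g, Rn 2 g, Rn 3 g, Rn 4 g]

def kfun (g : List (List Int)) : List (List Int) :=
  List.foldl min (Rn 1 g) [Rn 2 g, Rn 3 g, Rn 4 g]

/-- proof-side canonical key of A's greedy matching: the grid orbit minimum -/
def canonP (cells : List (Int × Int)) : List (List Int) := kfun (compactP cells)

lemma min?_orbit (g : List (List Int)) : (orbit g).min? = some (kfun g) := List.min?_cons'

lemma kfun_mem (g : List (List Int)) : kfun g ∈ orbit g := List.min?_mem (min?_orbit g)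

lemma min?_perm {l₁ l₂ : List (List (List Int))} (h : l₁.Perm l₂) : l₁.min? = l₂.min? := by
  cases h1 : l₁.min? with
  | none =>
    rw [List.min?_eq_none_iff] at h1
    subst h1
    have h2 : l₂ = [] := List.length_eq_zero_iff.mp (by simpa using h.length_eq.symm)
    subst h2
    rfl
  | some a =>
    cases h2 : l₂.min? with
    | none =>
      rw [List.min?_eq_none_iff] at h2
      subst h2
      have h3 : l₁ = [] := List.length_eq_zero_iff.mp (by simpa using h.length_eq)
      subst h3
      simp at h1
    | some b =>
      obtain ⟨ha, hale⟩ := (List.min?_eq_some_iff).mp h1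
      obtain ⟨hb, hble⟩ := (List.min?_eq_some_iff).mp h2
      have h3 : a ≤ b := hale b (h.mem_iff.mpr hb)
      have h4 : b ≤ a := hble a (h.mem_iff.mp ha)
      rw [le_antisymm h3 h4]

lemma orbit_Rn {g : List (List Int)} (h : Good g) (k : Nat) (hk1 : 1 ≤ k) (hk4 : k ≤ 4) :
    orbit (Rn k g) = (orbit g).rotate k := by
  have hR : ∀ a : Nat, Rn a (Rn k g) = Rn (a + k) g := fun a => (Rn_add a k g).symm
  interval_cases k
  · show [Rn 1 (Rn 1 g), Rn 2 (Rn 1 g), Rn 3 (Rn 1 g), Rn 4 (Rn 1 g)] = _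
    rw [hR 1, hR 2, hR 3, hR 4]
    rw [show (4 + 1 : Nat) = 1 + 4 from rfl, Rn_period h 1]
    rw [List.rotate_eq_drop_append_take (by simp [orbit])]
    rfl
  · show [Rn 1 (Rn 2 g), Rn 2 (Rn 2 g), Rn 3 (Rn 2 g), Rn 4 (Rn 2 g)] = _
    rw [hR 1, hR 2, hR 3, hR 4]
    rw [show (3 + 2 : Nat) = 1 + 4 from rfl, Rn_period h 1]
    rw [show (4 + 2 : Nat) = 2 + 4 from rfl, Rn_period h 2]
    rw [List.rotate_eq_drop_append_take (by simp [orbit])]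
    rfl
  · show [Rn 1 (Rn 3 g), Rn 2 (Rn 3 g), Rn 3 (Rn 3 g), Rn 4 (Rn 3 g)] = _
    rw [hR 1, hR 2, hR 3, hR 4]
    rw [show (2 + 3 : Nat) = 1 + 4 from rfl, Rn_period h 1]
    rw [show (3 + 3 : Nat) = 2 + 4 from rfl, Rn_period h 2]
    rw [show (4 + 3 : Nat) = 3 + 4 from rfl, Rn_period h 3]
    rw [List.rotate_eq_drop_append_take (by simp [orbit])]
    rfl
  · show [Rn 1 (Rn 4 g), Rn 2 (Rn 4 g), Rn 3 (Rn 4 g), Rn 4 (Rn 4 g)] = _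
    rw [hR 1, hR 2, hR 3, hR 4]
    rw [show (1 + 4 : Nat) = 1 + 4 from rfl, Rn_period h 1]
    rw [show (2 + 4 : Nat) = 2 + 4 from rfl, Rn_period h 2]
    rw [show (3 + 4 : Nat) = 3 + 4 from rfl, Rn_period h 3]
    rw [show (4 + 4 : Nat) = 4 + 4 from rfl, Rn_period h 4]
    rw [List.rotate_eq_drop_append_take (by simp [orbit])]
    rfl

lemma kfun_shift {g : List (List Int)} (h : Good g) (k : Nat) (hk1 : 1 ≤ k) (hk4 : k ≤ 4) :
    kfun (Rn k g) = kfun g := by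
  have horb : orbit (Rn k g) = (orbit g).rotate k := orbit_Rn h k hk1 hk4
  have := min?_perm ((orbit g).rotate_perm k)
  rw [← horb, min?_orbit, min?_orbit] at this
  exact Option.some_injective _ this

lemma mem_orbit_iff {x g : List (List Int)} :
    x ∈ orbit g ↔ ∃ k, 1 ≤ k ∧ k ≤ 4 ∧ x = Rn k g := by
  constructor
  · intro h
    simp only [orbit, List.mem_cons, List.not_mem_nil, or_false] at h
    rcases h with h | h | h | h
    · exact ⟨1, by omega, by omega, h⟩
    · exact ⟨2, by omega, by omega, h⟩
    · exact ⟨3, by omega, by omega, h⟩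
    · exact ⟨4, by omega, by omega, h⟩
  · rintro ⟨k, hk1, hk4, rfl⟩
    interval_cases k
    · exact List.mem_cons_self
    · exact List.mem_cons_of_mem _ List.mem_cons_self
    · exact List.mem_cons_of_mem _ (List.mem_cons_of_mem _ List.mem_cons_self)
    · exact List.mem_cons_of_mem _ (List.mem_cons_of_mem _ (List.mem_cons_of_mem _ List.mem_cons_self))

lemma match_iff {gE gP : List (List Int)} (hE : Good gE) (hP : Good gP) :
    gE ∈ orbit gP ↔ kfun gE = kfun gP := by
  constructor
  · intro h
    obtain ⟨k, hk1, hk4, rfl⟩ := mem_orbit_iff.mp h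
    exact kfun_shift hP k hk1 hk4
  · intro heq
    obtain ⟨j, hj1, hj4, hjE⟩ := mem_orbit_iff.mp (kfun_mem gE)
    obtain ⟨k, hk1, hk4, hkP⟩ := mem_orbit_iff.mp (kfun_mem gP)
    have h1 : Rn j gE = Rn k gP := by rw [← hjE, ← hkP, heq]
    have h2 : gE = Rn ((4 - j) + k) gP := by
      have h3 : Rn (4 - j) (Rn j gE) = gE := by
        rw [← Rn_add, show (4 - j) + j = 4 from by omega, Rn4_eq hE]
      rw [← h3, h1, ← Rn_add]
    by_cases hm : (4 - j) + k ≤ 4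
    · exact mem_orbit_iff.mpr ⟨(4 - j) + k, by omega, hm, h2⟩
    · have h4 : (4 - j) + k = ((4 - j) + k - 4) + 4 := by omega
      rw [h4, Rn_period hP] at h2
      exact mem_orbit_iff.mpr ⟨(4 - j) + k - 4, by omega, by omega, h2⟩

lemma rotTry_eq (gE : List (List Int)) {gP : List (List Int)} (hP : Good gP) :
    rotTry gE gP 4 = if gE ∈ orbit gP then some (onesP gP) else none := by
  have e0 := rotateP_eq gP hP.1
  have e1 := rotateP_eq (rotG gP) (good_rotG hP).1
  have e2 := rotateP_eq (rotG (rotG gP)) (good_rotG (good_rotG hP)).1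
  have e3 := rotateP_eq (rotG (rotG (rotG gP))) (good_rotG (good_rotG (good_rotG hP))).1
  have o1 : onesP (rotG gP) = onesP gP := ones_rotG _ hP.1
  have o2 : onesP (rotG (rotG gP)) = onesP gP := by
    rw [ones_rotG _ (good_rotG hP).1, o1]
  have o3 : onesP (rotG (rotG (rotG gP))) = onesP gP := by
    rw [ones_rotG _ (good_rotG (good_rotG hP)).1, o2]
  show (let cp := rotateP gP
    if gE = cp.2 then some cp.1 else rotTry gE cp.2 3) = _
  rw [e0]
  simp only []
  have horb : orbit gP = [rotG gP, rotG (rotG gP), rotG (rotG (rotG gP)),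
      rotG (rotG (rotG (rotG gP)))] := rfl
  by_cases h1 : gE = rotG gP
  · rw [if_pos h1, if_pos (by rw [horb, h1]; exact List.mem_cons_self)]
  · rw [if_neg h1]
    show (let cp := rotateP (rotG gP)
      if gE = cp.2 then some cp.1 else rotTry gE cp.2 2) = _
    rw [e1]
    simp only []
    by_cases h2 : gE = rotG (rotG gP)
    · rw [if_pos h2, o1,
        if_pos (by rw [horb, h2]; exact List.mem_cons_of_mem _ List.mem_cons_self)]
    · rw [if_neg h2]
      show (let cp := rotateP (rotG (rotG gP))
        if gE = cp.2 then some cp.1 else rotTry gE cp.2 1) = _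
      rw [e2]
      simp only []
      by_cases h3 : gE = rotG (rotG (rotG gP))
      · rw [if_pos h3, o2, if_pos (by
          rw [horb, h3]
          exact List.mem_cons_of_mem _ (List.mem_cons_of_mem _ List.mem_cons_self))]
      · rw [if_neg h3]
        show (let cp := rotateP (rotG (rotG (rotG gP)))
          if gE = cp.2 then some cp.1 else rotTry gE cp.2 0) = _
        rw [e3]
        simp only []
        by_cases h4 : gE = rotG (rotG (rotG (rotG gP)))
        · rw [if_pos h4, o3, if_pos (by
            rw [horb, h4]
            exact List.mem_cons_of_mem _ (List.mem_cons_of_mem _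
              (List.mem_cons_of_mem _ List.mem_cons_self)))]
        · rw [if_neg h4, if_neg (by
            rw [horb]
            intro hmem
            simp only [List.mem_cons, List.not_mem_nil, or_false] at hmem
            rcases hmem with h | h | h | h
            · exact h1 h
            · exact h2 h
            · exact h3 h
            · exact h4 h)]
          rfl

lemma pymin_fold_some {α κ : Type} [LT κ] [DecidableLT κ] (key : α → κ) (l : List α) :
    ∀ m : α, ∃ m', List.foldl
      (fun acc x => match acc with
        | none => some x
        | some m => if key x < key m then some x else some m) (some m) l = some m' := by
  induction l with
  | nil => intro m; exact ⟨m, rfl⟩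
  | cons x l ih =>
    intro m
    rw [List.foldl_cons]
    show ∃ m', List.foldl _ (if key x < key m then some x else some m) l = some m'
    by_cases h : key x < key m
    · rw [if_pos h]; exact ih x
    · rw [if_neg h]; exact ih m

lemma pymin?_isSome {α κ : Type} [LT κ] [DecidableLT κ] (xs : List α) (key : α → κ)
    (h : xs ≠ []) : ∃ m, PySem.List.min? xs key = some m := by
  cases xs with
  | nil => exact absurd rfl h
  | cons x l =>
    show ∃ m, List.foldl _ (some x) l = some m
    exact pymin_fold_some key l x

lemma pymax?_isSome {α κ : Type} [LT κ] [DecidableLT κ] (xs : List α) (key : α → κ)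
    (h : xs ≠ []) : ∃ m, PySem.List.max? xs key = some m := by
  cases hm : PySem.List.max? xs key with
  | some m => exact ⟨m, rfl⟩
  | none =>
    exfalso
    cases xs with
    | nil => exact h rfl
    | cons x l =>
      revert hm
      show PySem.List.max? (x :: l) key = none → False
      unfold PySem.List.max?
      intro hm
      have : ∀ (l' : List α) (m : α), List.foldl
          (fun acc y => match acc with
            | none => some y
            | some m => if key m < key y then some y else some m) (some m) l' ≠ none := by
        intro l'
        induction l' with
        | nil => intro m hc; cases hc
        | cons y l' ih =>
          intro m
          rw [List.foldl_cons]
          show List.foldl _ (if key m < key y then some y else some m) l' ≠ none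
          by_cases hy : key m < key y
          · rw [if_pos hy]; exact ih y
          · rw [if_neg hy]; exact ih m
      exact this l x hm

lemma gsetI_lengths (b : List (List Int)) (i j : Int) (x : Int) (hi : 0 ≤ i) :
    (gsetI b i j x).length = b.length ∧
    ∀ m : Nat, ((gsetI b i j x).getD m []).length = (b.getD m []).length := by
  unfold gsetI
  rw [PySem.List.pySetD_of_nonneg _ _ hi]
  refine ⟨List.length_set .., ?_⟩
  intro m
  rw [List.getD_eq_getElem?_getD, List.getD_eq_getElem?_getD, List.getElem?_set]
  by_cases he : i.toNat = m
  · rw [if_pos he]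
    by_cases hlt : i.toNat < b.length
    · rw [if_pos (by omega)]
      have hval : PySem.List.pyGetD b i [] = b[i.toNat] :=
        PySem.List.pyGetD_eq_getElem b [] hi (by omega)
      simp only [Option.getD_some]
      rw [PySem.List.length_pySetD, hval, ← he]
      rw [List.getElem?_eq_getElem (by omega), Option.getD_some]
    · rw [if_neg (by omega), List.getElem?_eq_none (by omega)]
  · rw [if_neg he]

lemma fold_gsetI_lengths (F G : Int × Int → Int) :
    ∀ (cells : List (Int × Int)), (∀ p ∈ cells, 0 ≤ F p) → ∀ b : List (List Int),
    ((cells.foldl (fun res p => gsetI res (F p) (G p) 1) b).length = b.length) ∧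
    (∀ m : Nat, ((cells.foldl (fun res p => gsetI res (F p) (G p) 1) b).getD m []).length
      = (b.getD m []).length) := by
  intro cells
  induction cells with
  | nil => intro _ b; exact ⟨rfl, fun _ => rfl⟩
  | cons p cells ih =>
    intro hF b
    rw [List.foldl_cons]
    have h1 := gsetI_lengths b (F p) (G p) 1 (hF p List.mem_cons_self)
    have h2 := ih (fun q hq => hF q (List.mem_cons_of_mem _ hq)) (gsetI b (F p) (G p) 1)
    exact ⟨h2.1.trans h1.1, fun m => (h2.2 m).trans (h1.2 m)⟩

-- proof-side names for compact's bounds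
def mnX (S : List (Int × Int)) : Int := PySem.List.minD (S.map (·.1)) id 0
def mxX (S : List (Int × Int)) : Int := PySem.List.maxD (S.map (·.1)) id 0
def mnY (S : List (Int × Int)) : Int := PySem.List.minD (S.map (·.2)) id 0
def mxY (S : List (Int × Int)) : Int := PySem.List.maxD (S.map (·.2)) id 0

lemma minD_spec (l : List Int) (h : l ≠ []) :
    PySem.List.minD l id 0 ∈ l ∧ ∀ y ∈ l, PySem.List.minD l id 0 ≤ y := by
  obtain ⟨m, hm⟩ := pymin?_isSome l id h
  have hval : PySem.List.minD l id 0 = m := by unfold PySem.List.minD; rw [hm]; rfl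
  rw [hval]
  exact ⟨PySem.List.min?_mem hm, fun y hy => PySem.List.min?_isMin hm y hy⟩

lemma maxD_spec (l : List Int) (h : l ≠ []) :
    PySem.List.maxD l id 0 ∈ l ∧ ∀ y ∈ l, y ≤ PySem.List.maxD l id 0 := by
  obtain ⟨m, hm⟩ := pymax?_isSome l id h
  have hval : PySem.List.maxD l id 0 = m := by unfold PySem.List.maxD; rw [hm]; rfl
  rw [hval]
  exact ⟨PySem.List.max?_mem hm, fun y hy => PySem.List.max?_isMax hm y hy⟩

lemma minD_congr_mem (l₁ l₂ : List Int) (h₁ : l₁ ≠ []) (h₂ : l₂ ≠ [])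
    (h : ∀ x, x ∈ l₁ ↔ x ∈ l₂) :
    PySem.List.minD l₁ id 0 = PySem.List.minD l₂ id 0 := by
  obtain ⟨m1, b1⟩ := minD_spec l₁ h₁
  obtain ⟨m2, b2⟩ := minD_spec l₂ h₂
  exact le_antisymm (b1 _ ((h _).mpr m2)) (b2 _ ((h _).mp m1))

lemma minD_map_neg (l : List Int) (h : l ≠ []) :
    PySem.List.minD (l.map (fun x => -x)) id 0 = -(PySem.List.maxD l id 0) := by
  obtain ⟨hmem, hmin⟩ := minD_spec (l.map (fun x => -x)) (by simpa using h)
  obtain ⟨hmem', hmax⟩ := maxD_spec l h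
  obtain ⟨y, hy, hyv⟩ := List.mem_map.mp hmem
  have h1 : PySem.List.minD (l.map (fun x => -x)) id 0 ≤ -(PySem.List.maxD l id 0) :=
    hmin _ (List.mem_map.mpr ⟨_, hmem', rfl⟩)
  have h2 : y ≤ PySem.List.maxD l id 0 := hmax y hy
  omega

lemma maxD_map_neg (l : List Int) (h : l ≠ []) :
    PySem.List.maxD (l.map (fun x => -x)) id 0 = -(PySem.List.minD l id 0) := by
  obtain ⟨hmem, hmax⟩ := maxD_spec (l.map (fun x => -x)) (by simpa using h)
  obtain ⟨hmem', hmin⟩ := minD_spec l h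
  obtain ⟨y, hy, hyv⟩ := List.mem_map.mp hmem
  have h1 : -(PySem.List.minD l id 0) ≤ PySem.List.maxD (l.map (fun x => -x)) id 0 :=
    hmax _ (List.mem_map.mpr ⟨_, hmem', rfl⟩)
  have h2 : PySem.List.minD l id 0 ≤ y := hmin y hy
  omega

lemma compact_bounds (S : List (Int × Int)) (h : S ≠ []) :
    mnX S ≤ mxX S ∧ mnY S ≤ mxY S ∧
    ∀ p ∈ S, mnX S ≤ p.1 ∧ p.1 ≤ mxX S ∧ mnY S ≤ p.2 ∧ p.2 ≤ mxY S := by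
  have hx : S.map (·.1) ≠ [] := by simpa using h
  have hy : S.map (·.2) ≠ [] := by simpa using h
  obtain ⟨hx1, hx2⟩ := minD_spec _ hx
  obtain ⟨hx3, hx4⟩ := maxD_spec _ hx
  obtain ⟨hy1, hy2⟩ := minD_spec _ hy
  obtain ⟨hy3, hy4⟩ := maxD_spec _ hy
  refine ⟨hx2 _ hx3, hy2 _ hy3, ?_⟩
  intro p hp
  exact ⟨hx2 _ (List.mem_map.mpr ⟨p, hp, rfl⟩), hx4 _ (List.mem_map.mpr ⟨p, hp, rfl⟩),
    hy2 _ (List.mem_map.mpr ⟨p, hp, rfl⟩), hy4 _ (List.mem_map.mpr ⟨p, hp, rfl⟩)⟩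

lemma compact_body (S : List (Int × Int)) :
    compactP S = S.foldl (fun res ij => gsetI res (ij.1 - mnX S) (ij.2 - mnY S) 1)
      ((PySem.List.pyRange 0 (mxX S - mnX S + 1) 1).map
        (fun _ => List.replicate (mxY S - mnY S + 1).toNat (0 : Int))) := rfl

lemma compact_shape (S : List (Int × Int)) (h : S ≠ []) :
    (compactP S).length = (mxX S - mnX S + 1).toNat ∧
    ∀ m : Nat, m < (mxX S - mnX S + 1).toNat →
      ((compactP S).getD m []).length = (mxY S - mnY S + 1).toNat := by
  obtain ⟨hxx, hyy, hb⟩ := compact_bounds S h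
  rw [compact_body]
  set init := (PySem.List.pyRange 0 (mxX S - mnX S + 1) 1).map
    (fun _ => List.replicate (mxY S - mnY S + 1).toNat (0 : Int)) with hinit
  have hinitlen : init.length = (mxX S - mnX S + 1).toNat := by
    rw [hinit, List.length_map, PySem.List.length_pyRange_one]
    congr 1
    omega
  have hinitrow : ∀ m : Nat, m < (mxX S - mnX S + 1).toNat →
      (init.getD m []).length = (mxY S - mnY S + 1).toNat := by
    intro m hm
    rw [hinit, List.getD_eq_getElem _ _
      (by rw [List.length_map, PySem.List.length_pyRange_one]; omega)]
    simp
  have hfold := fold_gsetI_lengths (fun p => p.1 - mnX S) (fun p => p.2 - mnY S) S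
    (fun p hp => by show (0:Int) ≤ p.1 - mnX S; have := (hb p hp).1; omega) init
  exact ⟨hfold.1.trans hinitlen, fun m hm => (hfold.2 m).trans (hinitrow m hm)⟩

lemma compact_good (cells : List (Int × Int)) (h : cells ≠ []) : Good (compactP cells) := by
  obtain ⟨hxx, hyy, _⟩ := compact_bounds cells h
  obtain ⟨hlen, hrow⟩ := compact_shape cells h
  have hrpos : 0 < (mxX cells - mnX cells + 1).toNat := by omega
  have hcpos : 0 < (mxY cells - mnY cells + 1).toNat := by omega
  have hhead : ((compactP cells).headD []).length = (mxY cells - mnY cells + 1).toNat := by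
    rw [headD_eq_getD_zero]
    exact hrow 0 hrpos
  refine ⟨?_, ?_, ?_⟩
  · intro row hrowmem
    obtain ⟨n, hn, rfl⟩ := List.getElem_of_mem hrowmem
    rw [hhead]
    have := hrow n (by omega)
    rw [List.getD_eq_getElem _ _ hn] at this
    exact this
  · intro h0
    rw [h0] at hlen
    simp at hlen
    omega
  · rw [hhead]
    omega

lemma set_getD_int (l : List Int) (j : Nat) (x : Int) (c : Nat) :
    (l.set j x).getD c 0 = if c = j ∧ j < l.length then x else l.getD c 0 := by
  conv_lhs => rw [List.getD_eq_getElem?_getD]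
  rw [List.getElem?_set]
  by_cases hcj : j = c
  · subst hcj
    by_cases hl : j < l.length
    · rw [if_pos rfl, if_pos hl, if_pos ⟨rfl, hl⟩]
      rfl
    · rw [if_pos rfl, if_neg hl, if_neg (by tauto)]
      conv_rhs => rw [List.getD_eq_getElem?_getD]
      rw [List.getElem?_eq_none (by omega)]
  · rw [if_neg hcj, if_neg (by tauto)]
    conv_rhs => rw [List.getD_eq_getElem?_getD]

lemma set_getD_row (b : List (List Int)) (i : Nat) (r : List Int) (a : Nat) (hi : i < b.length) :
    (b.set i r).getD a [] = if a = i then r else b.getD a [] := by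
  conv_lhs => rw [List.getD_eq_getElem?_getD]
  rw [List.getElem?_set]
  by_cases hai : i = a
  · rw [if_pos hai, if_pos hi, if_pos hai.symm]
    rfl
  · rw [if_neg hai, if_neg (fun h => hai h.symm)]
    conv_rhs => rw [List.getD_eq_getElem?_getD]

lemma gsetI_get (b : List (List Int)) (i j : Nat) (x : Int)
    (hi : i < b.length) (a c : Nat) :
    ggetN (gsetI b (i:Int) (j:Int) x) a c
      = if a = i ∧ c = j ∧ j < (b.getD i []).length then x else ggetN b a c := by
  rw [gsetI_cast]
  unfold ggetN
  rw [set_getD_row b i _ a hi]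
  by_cases hai : a = i
  · rw [if_pos hai, set_getD_int]
    subst hai
    by_cases hc : c = j ∧ j < (b.getD a []).length
    · rw [if_pos hc, if_pos ⟨rfl, hc.1, hc.2⟩]
    · rw [if_neg hc, if_neg (by tauto)]
  · rw [if_neg hai, if_neg (by tauto)]

lemma getD_map_const {α β : Type} [Inhabited β] (l : List α) (v : β) (m : Nat) (d : β)
    (h : m < l.length) : (l.map (fun _ => v)).getD m d = v := by
  rw [List.getD_eq_getElem _ _ (by simpa using h)]
  simp

lemma fold_gsetI_get (x0 y0 : Int) (a b : Nat) :
    ∀ (cells : List (Int × Int)) (g : List (List Int)),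
    (∀ p ∈ cells, 0 ≤ p.1 - x0 ∧ p.1 - x0 < g.length ∧ 0 ≤ p.2 - y0 ∧
       p.2 - y0 < ((g.getD (p.1 - x0).toNat []).length : Int)) →
    ggetN (cells.foldl (fun res ij => gsetI res (ij.1 - x0) (ij.2 - y0) 1) g) a b
    = if ∃ p ∈ cells, p.1 - x0 = (a:Int) ∧ p.2 - y0 = (b:Int) then 1 else ggetN g a b := by
  intro cells
  induction cells with
  | nil => intro g hbd; simp
  | cons p cells ih =>
    intro g hbd
    rw [List.foldl_cons]
    obtain ⟨h1, h2, h3, h4⟩ := hbd p List.mem_cons_self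
    set i : Nat := (p.1 - x0).toNat with hidef
    set j : Nat := (p.2 - y0).toNat with hjdef
    have hcast1 : p.1 - x0 = (i : Int) := by omega
    have hcast2 : p.2 - y0 = (j : Int) := by omega
    have hlen := gsetI_lengths g (p.1 - x0) (p.2 - y0) 1 h1
    have hbd' : ∀ q ∈ cells, 0 ≤ q.1 - x0 ∧
        q.1 - x0 < (gsetI g (p.1 - x0) (p.2 - y0) 1).length ∧ 0 ≤ q.2 - y0 ∧
        q.2 - y0 < (((gsetI g (p.1 - x0) (p.2 - y0) 1).getD (q.1 - x0).toNat []).length : Int) := by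
      intro q hq
      obtain ⟨k1, k2, k3, k4⟩ := hbd q (List.mem_cons_of_mem _ hq)
      rw [hlen.1, hlen.2]
      exact ⟨k1, k2, k3, k4⟩
    rw [ih _ hbd']
    rw [hcast1, hcast2, gsetI_get g i j 1 (by omega) a b]
    have hjlt : j < (g.getD i []).length := by omega
    by_cases hex : ∃ q ∈ cells, q.1 - x0 = (a:Int) ∧ q.2 - y0 = (b:Int)
    · obtain ⟨q, hq, hqe⟩ := hex
      rw [if_pos ⟨q, hq, hqe⟩, if_pos ⟨q, List.mem_cons_of_mem _ hq, hqe⟩]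
    · rw [if_neg hex]
      by_cases hab : a = i ∧ b = j
      · rw [if_pos ⟨hab.1, hab.2, hjlt⟩,
          if_pos ⟨p, List.mem_cons_self, by omega, by omega⟩]
      · rw [if_neg (by tauto), if_neg ?_]
        rintro ⟨q, hq, hqe⟩
        rcases List.mem_cons.mp hq with rfl | hq'
        · exact hab ⟨by omega, by omega⟩
        · exact hex ⟨q, hq', hqe⟩

lemma compact_get (S : List (Int × Int)) (h : S ≠ []) (a b : Nat)
    (ha : (a : Int) ≤ mxX S - mnX S) (hb : (b : Int) ≤ mxY S - mnY S) :
    ggetN (compactP S) a b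
      = if ((a : Int) + mnX S, (b : Int) + mnY S) ∈ S then 1 else 0 := by
  obtain ⟨hxx, hyy, hbd⟩ := compact_bounds S h
  rw [compact_body]
  set R : Nat := (mxX S - mnX S + 1).toNat with hR
  set C : Nat := (mxY S - mnY S + 1).toNat with hC
  set init := (PySem.List.pyRange 0 (mxX S - mnX S + 1) 1).map
    (fun _ => List.replicate (mxY S - mnY S + 1).toNat (0 : Int)) with hinit
  have hinitlen : init.length = R := by
    rw [hinit, List.length_map, PySem.List.length_pyRange_one]
    congr 1
    omega
  have hinitrow : ∀ m : Nat, m < R → init.getD m [] = List.replicate C (0 : Int) := by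
    intro m hm
    rw [hinit]
    exact getD_map_const _ _ m [] (by rw [PySem.List.length_pyRange_one]; omega)
  have hinitget : ∀ a' b' : Nat, a' < R → ggetN init a' b' = 0 := by
    intro a' b' ha'
    unfold ggetN
    rw [hinitrow a' ha', List.getD_eq_getElem?_getD, List.getElem?_replicate]
    split <;> rfl
  have hbounds : ∀ p ∈ S, 0 ≤ p.1 - mnX S ∧ p.1 - mnX S < init.length ∧ 0 ≤ p.2 - mnY S ∧
      p.2 - mnY S < ((init.getD (p.1 - mnX S).toNat []).length : Int) := by
    intro p hp
    obtain ⟨k1, k2, k3, k4⟩ := hbd p hp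
    have hlt : (p.1 - mnX S).toNat < R := by omega
    refine ⟨by omega, by omega, by omega, ?_⟩
    rw [hinitrow _ hlt, List.length_replicate]
    omega
  rw [fold_gsetI_get (mnX S) (mnY S) a b S init hbounds]
  by_cases hmem : ((a : Int) + mnX S, (b : Int) + mnY S) ∈ S
  · rw [if_pos hmem, if_pos ⟨((a : Int) + mnX S, (b : Int) + mnY S), hmem, by omega, by omega⟩]
  · rw [if_neg hmem, if_neg ?_, hinitget a b (by omega)]
    rintro ⟨p, hp, c1, c2⟩
    apply hmem
    have hpe : p = ((a : Int) + mnX S, (b : Int) + mnY S) :=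
      Prod.ext_iff.mpr ⟨by omega, by omega⟩
    rwa [hpe] at hp

-- cell-level rotation (i, j) -> (j, -i), matching grid rotation

def crotC (S : List (Int × Int)) : List (Int × Int) := S.map (fun p => (p.2, -p.1))

def crotIter : Nat → List (Int × Int) → List (Int × Int)
  | 0, S => S
  | k+1, S => crotC (crotIter k S)

lemma crotC_ne {S : List (Int × Int)} (h : S ≠ []) : crotC S ≠ [] := by
  simpa [crotC] using h

lemma crotIter_ne {S : List (Int × Int)} (h : S ≠ []) (k : Nat) : crotIter k S ≠ [] := by
  induction k with
  | zero => exact h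
  | succ k ih => exact crotC_ne ih

lemma mem_crotC {S : List (Int × Int)} {u v : Int} :
    (u, v) ∈ crotC S ↔ (-v, u) ∈ S := by
  unfold crotC
  rw [List.mem_map]
  constructor
  · rintro ⟨p, hp, he⟩
    have h1 : u = p.2 ∧ v = -p.1 := by
      have := Prod.ext_iff.mp he.symm
      exact ⟨this.1, this.2⟩
    have h2 : (-v, u) = p := Prod.ext_iff.mpr ⟨by omega, by omega⟩
    rwa [h2]
  · intro hp
    exact ⟨(-v, u), hp, Prod.ext_iff.mpr ⟨rfl, by omega⟩⟩

lemma compact_crot (S : List (Int × Int)) (h : S ≠ []) :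
    compactP (crotC S) = rotG (compactP S) := by
  have hC : crotC S ≠ [] := crotC_ne h
  have e1 : (crotC S).map (·.1) = S.map (·.2) := by
    unfold crotC
    rw [List.map_map]
    rfl
  have e2 : (crotC S).map (·.2) = (S.map (·.1)).map (fun x => -x) := by
    unfold crotC
    rw [List.map_map, List.map_map]
    rfl
  have hmapne : S.map (·.1) ≠ [] := by simpa using h
  have m1 : mnX (crotC S) = mnY S := by rw [mnX, e1]; rfl
  have m2 : mxX (crotC S) = mxY S := by rw [mxX, e1]; rfl
  have m3 : mnY (crotC S) = -(mxX S) := by rw [mnY, e2]; exact minD_map_neg _ hmapne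
  have m4 : mxY (crotC S) = -(mnX S) := by rw [mxY, e2]; exact maxD_map_neg _ hmapne
  obtain ⟨hxxS, hyyS, hbS⟩ := compact_bounds S h
  obtain ⟨hlS, hrS⟩ := compact_shape S h
  obtain ⟨hlC, hrC⟩ := compact_shape (crotC S) hC
  have hRpos : 0 < (mxX S - mnX S + 1).toNat := by omega
  have hCpos : 0 < (mxY S - mnY S + 1).toNat := by omega
  have hheadS : ((compactP S).headD []).length = (mxY S - mnY S + 1).toNat := by
    rw [headD_eq_getD_zero]
    exact hrS 0 hRpos
  have hheadC : ((compactP (crotC S)).headD []).length = (mxX S - mnX S + 1).toNat := by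
    rw [headD_eq_getD_zero]
    have := hrC 0 (by rw [m1, m2]; omega)
    rw [this, m3, m4]
    congr 1
    omega
  have hgoodS : Good (compactP S) := compact_good S h
  have hlenC : (compactP (crotC S)).length = (mxY S - mnY S + 1).toNat := by
    rw [hlC, m1, m2]
  have hlenR : (rotG (compactP S)).length = (mxY S - mnY S + 1).toNat := by
    rw [length_rotG, hheadS]
  have hheadR : ((rotG (compactP S)).headD []).length = (mxX S - mnX S + 1).toNat := by
    rw [headD_rotG _ (by rw [hheadS]; omega), hlS]
  apply grid_ext (compact_good (crotC S) hC).1 (RectH_rotG _) (by rw [hlenC, hlenR])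
    (by rw [hheadC, hheadR])
  intro a b ha hb
  rw [hlenC] at ha
  rw [hheadC] at hb
  have hrot := ggetN_rotG (compactP S) (j := a) (k := b)
    (by rw [hheadS]; omega) (by rw [hlS]; omega)
  rw [hrot, hlS]
  have hgetC := compact_get (crotC S) hC a b
    (by rw [m1, m2]; omega) (by rw [m3, m4]; omega)
  have hbnat : ((mxX S - mnX S + 1).toNat - 1 - b : Nat) < (mxX S - mnX S + 1).toNat := by
    omega
  have hgetS := compact_get S h ((mxX S - mnX S + 1).toNat - 1 - b) a
    (by omega) (by omega)
  rw [hgetC, hgetS]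
  have hmm : ((a : Int) + mnX (crotC S), (b : Int) + mnY (crotC S)) ∈ crotC S
      ↔ ((((mxX S - mnX S + 1).toNat - 1 - b : Nat) : Int) + mnX S, (a : Int) + mnY S) ∈ S := by
    rw [m1, m3, mem_crotC]
    have hx : -((b : Int) + -(mxX S)) = (((mxX S - mnX S + 1).toNat - 1 - b : Nat) : Int) + mnX S := by
      omega
    rw [hx]
  by_cases hm : ((a : Int) + mnX (crotC S), (b : Int) + mnY (crotC S)) ∈ crotC S
  · rw [if_pos hm, if_pos (hmm.mp hm)]
  · rw [if_neg hm, if_neg (fun hc => hm (hmm.mpr hc))]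

lemma Rn_compact (S : List (Int × Int)) (h : S ≠ []) (k : Nat) :
    compactP (crotIter k S) = Rn k (compactP S) := by
  induction k with
  | zero => rfl
  | succ k ih =>
    show compactP (crotC (crotIter k S)) = rotG (Rn k (compactP S))
    rw [compact_crot _ (crotIter_ne h k), ih]

-- row-major list of the coordinates of the 1-entries of a grid

def onesCells (g : List (List Int)) : List (List Int) :=
  (List.range g.length).flatMap (fun a =>
    ((List.range (g.headD []).length).filter (fun b => ggetN g a b == 1)).map
      (fun b => [((a : Nat) : Int), ((b : Nat) : Int)]))

lemma mem_onesCells {g : List (List Int)} {x : List Int} :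
    x ∈ onesCells g ↔ ∃ a b : Nat, a < g.length ∧ b < (g.headD []).length ∧
      ggetN g a b = 1 ∧ x = [(a : Int), (b : Int)] := by
  unfold onesCells
  simp only [List.mem_flatMap, List.mem_map, List.mem_filter, List.mem_range, beq_iff_eq]
  constructor
  · rintro ⟨a, ha, b, ⟨hb, hgb⟩, rfl⟩
    exact ⟨a, b, ha, hb, hgb, rfl⟩
  · rintro ⟨a, b, ha, hb, hgb, rfl⟩
    exact ⟨a, ha, b, ⟨hb, hgb⟩, rfl⟩

lemma pairLex {a₁ b₁ a₂ b₂ : Int} :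
    (([a₁, b₁] : List Int) < [a₂, b₂]) ↔ (a₁ < a₂ ∨ (a₁ = a₂ ∧ b₁ < b₂)) := by
  show List.Lex _ _ _ ↔ _
  constructor
  · intro h
    cases h with
    | rel h => exact Or.inl h
    | cons h =>
      cases h with
      | rel h2 => exact Or.inr ⟨rfl, h2⟩
      | cons h2 => cases h2
  · rintro (h | ⟨rfl, h⟩)
    · exact List.Lex.rel h
    · exact List.Lex.cons (List.Lex.rel h)

lemma pairwise_lt_onesCells (g : List (List Int)) : (onesCells g).Pairwise (· < ·) := by
  unfold onesCells
  refine List.pairwise_flatMap.mpr ⟨?_, ?_⟩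
  · intro a _
    rw [List.pairwise_map]
    have hp : ((List.range (g.headD []).length).filter
        (fun b => ggetN g a b == 1)).Pairwise (· < ·) :=
      (List.pairwise_lt_range).sublist List.filter_sublist
    exact hp.imp (fun h => pairLex.mpr (Or.inr ⟨rfl, by exact_mod_cast h⟩))
  · have hp : (List.range g.length).Pairwise (· < ·) := List.pairwise_lt_range
    refine hp.imp ?_
    intro a₁ a₂ hlt x hx y hy
    obtain ⟨b1, -, rfl⟩ := List.mem_map.mp hx
    obtain ⟨b2, -, rfl⟩ := List.mem_map.mp hy
    exact pairLex.mpr (Or.inl (by exact_mod_cast hlt))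

lemma nodup_onesCells (g : List (List Int)) : (onesCells g).Nodup :=
  (pairwise_lt_onesCells g).imp ne_of_lt

lemma sum_range_list_nat (n : Nat) (g : Nat → Nat) :
    (((List.range n).map g).sum : Int) = ∑ j ∈ Finset.range n, (g j : Int) := by
  induction n with
  | zero => simp
  | succ n ih =>
    rw [List.range_succ, List.map_append, List.sum_append, Finset.sum_range_succ, ← ih]
    push_cast
    simp

lemma countP_range_int (n : Nat) (p : Nat → Bool) :
    (((List.range n).countP p : Nat) : Int)
      = ∑ j ∈ Finset.range n, (if p j then (1:Int) else 0) := by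
  induction n with
  | zero => simp
  | succ n ih =>
    rw [List.range_succ, List.countP_append, Finset.sum_range_succ, ← ih]
    by_cases h : p n <;> simp [List.countP_cons, h]

lemma length_onesCells (g : List (List Int)) (hrect : RectH g) :
    ((onesCells g).length : Int) = onesP g := by
  have h1 : (onesCells g).length = ((List.range g.length).map
      (fun a => (List.range (g.headD []).length).countP (fun b => ggetN g a b == 1))).sum := by
    unfold onesCells
    rw [List.length_flatMap]
    congr 1
    apply List.map_congr_left
    intro a _
    rw [List.length_map]
    exact List.countP_eq_length_filter.symm
  rw [h1, sum_range_list_nat]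
  have h3 : onesP g = ∑ a ∈ Finset.range g.length,
      (List.count 1 (g.getD a []) : Int) := by
    unfold onesP
    rw [sum_map_getD]
    apply Finset.sum_congr rfl
    intro a _
    rfl
  rw [h3]
  apply Finset.sum_congr rfl
  intro a ha
  rw [countP_range_int, count1_int]
  have hlen : (g.getD a []).length = (g.headD []).length := by
    rw [List.getD_eq_getElem _ _ (Finset.mem_range.mp ha)]
    exact hrect _ (List.getElem_mem (Finset.mem_range.mp ha))
  rw [hlen]
  apply Finset.sum_congr rfl
  intro b _
  rw [show (g.getD a []).getD b 0 = ggetN g a b from rfl]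
  by_cases hgb : ggetN g a b = 1 <;> simp [hgb]

lemma onesCells_inj {S T : List (Int × Int)} (hS : S ≠ []) (hT : T ≠ [])
    (h : onesCells (compactP S) = onesCells (compactP T)) : compactP S = compactP T := by
  -- member form and bounds of onesCells
  have hub : ∀ (g : List (List Int)) (aa bb : Nat), [(aa : Int), (bb : Int)] ∈ onesCells g →
      aa < g.length ∧ bb < (g.headD []).length := by
    intro g aa bb hx
    obtain ⟨a, b, ha, hb, _, he⟩ := mem_onesCells.mp hx
    have h1 : (aa : Int) = (a : Int) ∧ (bb : Int) = (b : Int) := by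
      simpa using he
    exact ⟨by omega, by omega⟩
  -- a 1 on the last row and a 1 on the last column
  have hwitRow : ∀ (U : List (Int × Int)), U ≠ [] → ∃ bb : Nat,
      [((compactP U).length - 1 : Nat) , (bb : Nat)].map (Nat.cast) ∈ onesCells (compactP U) := by
    intro U hU
    obtain ⟨hxx, hyy, hbU⟩ := compact_bounds U hU
    obtain ⟨hl, hr⟩ := compact_shape U hU
    obtain ⟨p, hp, hpe⟩ := List.mem_map.mp (maxD_spec (U.map (·.1)) (by simpa using hU)).1
    obtain ⟨k1, k2, k3, k4⟩ := hbU p hp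
    refine ⟨(p.2 - mnY U).toNat, mem_onesCells.mpr
      ⟨(compactP U).length - 1, (p.2 - mnY U).toNat, by rw [hl]; omega, ?_, ?_, rfl⟩⟩
    · rw [headD_eq_getD_zero, hr 0 (by omega)]
      omega
    · rw [compact_get U hU _ _ (by rw [hl]; omega) (by omega)]
      rw [if_pos ?_]
      have hpe2 : p = ((((compactP U).length - 1 : Nat) : Int) + mnX U,
          (((p.2 - mnY U).toNat : Nat) : Int) + mnY U) := by
        apply Prod.ext_iff.mpr
        constructor
        · show p.1 = _
          rw [hl]
          have : p.1 = mxX U := hpe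
          omega
        · show p.2 = _
          omega
      rwa [← hpe2]
  have hwitCol : ∀ (U : List (Int × Int)), U ≠ [] → ∃ aa : Nat,
      [(aa : Nat), (((compactP U).headD []).length - 1 : Nat)].map (Nat.cast)
        ∈ onesCells (compactP U) := by
    intro U hU
    obtain ⟨hxx, hyy, hbU⟩ := compact_bounds U hU
    obtain ⟨hl, hr⟩ := compact_shape U hU
    have hhead : ((compactP U).headD []).length = (mxY U - mnY U + 1).toNat := by
      rw [headD_eq_getD_zero]
      exact hr 0 (by omega)
    obtain ⟨p, hp, hpe⟩ := List.mem_map.mp (maxD_spec (U.map (·.2)) (by simpa using hU)).1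
    obtain ⟨k1, k2, k3, k4⟩ := hbU p hp
    refine ⟨(p.1 - mnX U).toNat, mem_onesCells.mpr
      ⟨(p.1 - mnX U).toNat, ((compactP U).headD []).length - 1, by rw [hl]; omega,
        by omega, ?_, rfl⟩⟩
    rw [compact_get U hU _ _ (by omega) (by rw [hhead]; omega)]
    rw [if_pos ?_]
    have hpe2 : p = ((((p.1 - mnX U).toNat : Nat) : Int) + mnX U,
        (((((compactP U).headD []).length - 1 : Nat)) : Int) + mnY U) := by
      apply Prod.ext_iff.mpr
      constructor
      · show p.1 = _
        omega
      · show p.2 = _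
        rw [hhead]
        have : p.2 = mxY U := hpe
        omega
    rwa [← hpe2]
  -- equal dimensions
  have hGS := compact_good S hS
  have hGT := compact_good T hT
  have hposS : 0 < (compactP S).length ∧ 0 < ((compactP S).headD []).length := by
    constructor
    · cases hcp : compactP S with
      | nil => exact absurd hcp hGS.2.1
      | cons r rs => simp
    · have := hGS.2.2
      omega
  have hposT : 0 < (compactP T).length ∧ 0 < ((compactP T).headD []).length := by
    constructor
    · cases hcp : compactP T with
      | nil => exact absurd hcp hGT.2.1
      | cons r rs => simp
    · have := hGT.2.2
      omega
  obtain ⟨bS, hbSw⟩ := hwitRow S hS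
  obtain ⟨bT, hbTw⟩ := hwitRow T hT
  obtain ⟨aS, haSw⟩ := hwitCol S hS
  obtain ⟨aT, haTw⟩ := hwitCol T hT
  simp only [List.map_cons, List.map_nil] at hbSw hbTw haSw haTw
  rw [h] at hbSw haSw
  rw [← h] at hbTw haTw
  have d1 := hub _ _ _ hbSw
  have d2 := hub _ _ _ hbTw
  have d3 := hub _ _ _ haSw
  have d4 := hub _ _ _ haTw
  have hleneq : (compactP S).length = (compactP T).length := by omega
  have hheadeq : ((compactP S).headD []).length = ((compactP T).headD []).length := by omega
  -- equal entries
  apply grid_ext hGS.1 hGT.1 hleneq hheadeq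
  intro a b ha hb
  obtain ⟨hlS, hrS⟩ := compact_shape S hS
  obtain ⟨hlT, hrT⟩ := compact_shape T hT
  obtain ⟨hxxS, hyyS, _⟩ := compact_bounds S hS
  obtain ⟨hxxT, hyyT, _⟩ := compact_bounds T hT
  have hheadS : ((compactP S).headD []).length = (mxY S - mnY S + 1).toNat := by
    rw [headD_eq_getD_zero]
    exact hrS 0 (by omega)
  have hheadT : ((compactP T).headD []).length = (mxY T - mnY T + 1).toNat := by
    rw [headD_eq_getD_zero]
    exact hrT 0 (by omega)
  have hgS := compact_get S hS a b (by rw [hlS] at ha; omega)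
    (by rw [hheadS] at hb; omega)
  have hgT := compact_get T hT a b (by rw [hleneq, hlT] at ha; omega)
    (by rw [hheadeq, hheadT] at hb; omega)
  have hmemiff : ggetN (compactP S) a b = 1 ↔ ggetN (compactP T) a b = 1 := by
    constructor
    · intro h1
      have hmS : [(a : Int), (b : Int)] ∈ onesCells (compactP S) :=
        mem_onesCells.mpr ⟨a, b, ha, hb, h1, rfl⟩
      rw [h] at hmS
      obtain ⟨a', b', _, _, hval, he⟩ := mem_onesCells.mp hmS
      have h2 : (a : Int) = (a' : Int) ∧ (b : Int) = (b' : Int) := by simpa using he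
      have h3 : a = a' ∧ b = b' := by omega
      rwa [h3.1, h3.2]
    · intro h1
      have hmT : [(a : Int), (b : Int)] ∈ onesCells (compactP T) :=
        mem_onesCells.mpr ⟨a, b, by omega, by omega, h1, rfl⟩
      rw [← h] at hmT
      obtain ⟨a', b', _, _, hval, he⟩ := mem_onesCells.mp hmT
      have h2 : (a : Int) = (a' : Int) ∧ (b : Int) = (b' : Int) := by simpa using he
      have h3 : a = a' ∧ b = b' := by omega
      rwa [h3.1, h3.2]
  rw [hgS, hgT]
  rw [hgS, hgT] at hmemiff
  by_cases hm1 : ((a : Int) + mnX S, (b : Int) + mnY S) ∈ S <;>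
    by_cases hm2 : ((a : Int) + mnX T, (b : Int) + mnY T) ∈ T <;>
      simp [hm1, hm2] at hmemiff ⊢

-- unrolling canonB

def SetRep (pts : PySem.Set (List Int)) (T : List (Int × Int)) : Prop :=
  pts.Nodup ∧ ∀ x, x ∈ pts ↔ ∃ p ∈ T, x = [p.1, p.2]

lemma canonBStep_spec (pts : PySem.Set (List Int)) (T : List (Int × Int)) (hT : T ≠ [])
    (hrep : SetRep pts T) :
    SetRep (canonBStep pts).1 (crotC T) ∧
    (canonBStep pts).2 = onesCells (compactP (crotC T)) := by
  obtain ⟨hnd, hmem⟩ := hrep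
  have hT' : crotC T ≠ [] := crotC_ne hT
  set pts' : PySem.Set (List Int) :=
    PySem.Set.ofList (pts.map (fun p => [p.getD 1 0, -(p.getD 0 0)])) with hpts'
  have hfst : (canonBStep pts).1 = pts' := rfl
  have hmem' : ∀ x, x ∈ pts' ↔ ∃ p ∈ crotC T, x = [p.1, p.2] := by
    intro x
    rw [hpts', PySem.Set.mem_ofList, List.mem_map]
    constructor
    · rintro ⟨q, hq, rfl⟩
      obtain ⟨p, hp, rfl⟩ := (hmem q).mp hq
      exact ⟨(p.2, -p.1), List.mem_map.mpr ⟨p, hp, rfl⟩, rfl⟩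
    · rintro ⟨p', hp', rfl⟩
      obtain ⟨p, hp, rfl⟩ := List.mem_map.mp hp'
      exact ⟨[p.1, p.2], (hmem _).mpr ⟨p, hp, rfl⟩, rfl⟩
  have hrep' : SetRep (canonBStep pts).1 (crotC T) := by
    rw [hfst]
    exact ⟨PySem.Set.nodup_ofList _, hmem'⟩
  refine ⟨hrep', ?_⟩
  obtain ⟨q₀, hq₀⟩ := List.exists_mem_of_ne_nil _ hT'
  have hptsne : pts' ≠ [] :=
    List.ne_nil_of_mem ((hmem' [q₀.1, q₀.2]).mpr ⟨q₀, hq₀, rfl⟩)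
  set mi := PySem.List.minD (pts'.map (fun p => p.getD 0 0)) id 0 with hmidef
  set mj := PySem.List.minD (pts'.map (fun p => p.getD 1 0)) id 0 with hmjdef
  have hsnd : (canonBStep pts).2 = PySem.List.sorted
      (pts'.map (fun p => [p.getD 0 0 - mi, p.getD 1 0 - mj])) (fun x => x) false := rfl
  have hmi : mi = mnX (crotC T) := by
    rw [hmidef]
    apply minD_congr_mem _ _ (by simpa using hptsne) (by simpa using hT')
    intro v
    rw [List.mem_map, List.mem_map]
    constructor
    · rintro ⟨q, hq, rfl⟩
      obtain ⟨p, hp, rfl⟩ := (hmem' q).mp hq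
      exact ⟨p, hp, rfl⟩
    · rintro ⟨p, hp, rfl⟩
      exact ⟨[p.1, p.2], (hmem' _).mpr ⟨p, hp, rfl⟩, rfl⟩
  have hmj : mj = mnY (crotC T) := by
    rw [hmjdef]
    apply minD_congr_mem _ _ (by simpa using hptsne) (by simpa using hT')
    intro v
    rw [List.mem_map, List.mem_map]
    constructor
    · rintro ⟨q, hq, rfl⟩
      obtain ⟨p, hp, rfl⟩ := (hmem' q).mp hq
      exact ⟨p, hp, rfl⟩
    · rintro ⟨p, hp, rfl⟩
      exact ⟨[p.1, p.2], (hmem' _).mpr ⟨p, hp, rfl⟩, rfl⟩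
  rw [hsnd, hmi, hmj]
  obtain ⟨hxx', hyy', hb'⟩ := compact_bounds (crotC T) hT'
  obtain ⟨hl', hr'⟩ := compact_shape (crotC T) hT'
  have hhead' : ((compactP (crotC T)).headD []).length = (mxY (crotC T) - mnY (crotC T) + 1).toNat := by
    rw [headD_eq_getD_zero]
    exact hr' 0 (by omega)
  have hd : (fun (a b : List Int) => a.decidableLT b)
      = (LinearOrder.toDecidableLT : DecidableLT (List Int)) := Subsingleton.elim _ _
  rw [hd]
  refine PySem.List.sorted_eq_of_perm_of_pairwise_lt _ _ _ ?_ ?_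
  · apply (List.perm_ext_iff_of_nodup (nodup_onesCells _) ?_).mpr
    · intro z
      constructor
      · intro hz
        obtain ⟨a, b, ha, hb, hval, rfl⟩ := mem_onesCells.mp hz
        rw [hl'] at ha
        rw [hhead'] at hb
        have hmemT : ((a : Int) + mnX (crotC T), (b : Int) + mnY (crotC T)) ∈ crotC T := by
          by_contra hc
          rw [compact_get (crotC T) hT' a b (by omega) (by omega), if_neg hc] at hval
          exact absurd hval (by norm_num)
        refine List.mem_map.mpr ⟨[(a : Int) + mnX (crotC T), (b : Int) + mnY (crotC T)],
          (hmem' _).mpr ⟨_, hmemT, rfl⟩, ?_⟩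
        show [((a : Int) + mnX (crotC T)) - mnX (crotC T),
          ((b : Int) + mnY (crotC T)) - mnY (crotC T)] = [(a : Int), (b : Int)]
        rw [add_sub_cancel_right, add_sub_cancel_right]
      · intro hz
        obtain ⟨q, hq, rfl⟩ := List.mem_map.mp hz
        obtain ⟨p, hp, rfl⟩ := (hmem' q).mp hq
        obtain ⟨k1, k2, k3, k4⟩ := hb' p hp
        apply mem_onesCells.mpr
        refine ⟨(p.1 - mnX (crotC T)).toNat, (p.2 - mnY (crotC T)).toNat,
          by rw [hl']; omega, by rw [hhead']; omega, ?_, ?_⟩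
        · rw [compact_get (crotC T) hT' _ _ (by omega) (by omega), if_pos ?_]
          have hpe : p = ((((p.1 - mnX (crotC T)).toNat : Nat) : Int) + mnX (crotC T),
              (((p.2 - mnY (crotC T)).toNat : Nat) : Int) + mnY (crotC T)) :=
            Prod.ext_iff.mpr ⟨by show p.1 = _; omega, by show p.2 = _; omega⟩
          rwa [← hpe]
        · show [p.1 - mnX (crotC T), p.2 - mnY (crotC T)] = _
          have e1 : p.1 - mnX (crotC T) = (((p.1 - mnX (crotC T)).toNat : Nat) : Int) := by omega
          have e2 : p.2 - mnY (crotC T) = (((p.2 - mnY (crotC T)).toNat : Nat) : Int) := by omega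
          rw [← e1, ← e2]
    · apply List.Nodup.map_on ?_ (PySem.Set.nodup_ofList _)
      intro u hu v hv he
      obtain ⟨p, hp, rfl⟩ := (hmem' u).mp hu
      obtain ⟨q, hq, rfl⟩ := (hmem' v).mp hv
      have : p.1 - mnX (crotC T) = q.1 - mnX (crotC T) ∧
          p.2 - mnY (crotC T) = q.2 - mnY (crotC T) := by
        simpa using he
      have h1 : p.1 = q.1 := by omega
      have h2 : p.2 = q.2 := by omega
      rw [h1, h2]
  · exact pairwise_lt_onesCells _

lemma canonB_eq (cells : List (Int × Int)) (h : cells ≠ []) :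
    canonB cells
      = List.foldl min (onesCells (Rn 1 (compactP cells)))
          [onesCells (Rn 2 (compactP cells)), onesCells (Rn 3 (compactP cells)),
           onesCells (Rn 4 (compactP cells))] := by
  have hrep0 : SetRep (PySem.Set.ofList (cells.map (fun p => [p.1, p.2]))) cells := by
    refine ⟨PySem.Set.nodup_ofList _, ?_⟩
    intro x
    rw [PySem.Set.mem_ofList, List.mem_map]
    constructor
    · rintro ⟨p, hp, rfl⟩
      exact ⟨p, hp, rfl⟩
    · rintro ⟨p, hp, rfl⟩
      exact ⟨p, hp, rfl⟩
  obtain ⟨hrep1, hc1⟩ := canonBStep_spec _ cells h hrep0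
  obtain ⟨hrep2, hc2⟩ := canonBStep_spec _ _ (crotC_ne h) hrep1
  obtain ⟨hrep3, hc3⟩ := canonBStep_spec _ _ (crotC_ne (crotC_ne h)) hrep2
  obtain ⟨hrep4, hc4⟩ := canonBStep_spec _ _ (crotC_ne (crotC_ne (crotC_ne h))) hrep3
  have r1 : compactP (crotC cells) = Rn 1 (compactP cells) := Rn_compact cells h 1
  have r2 : compactP (crotC (crotC cells)) = Rn 2 (compactP cells) := Rn_compact cells h 2
  have r3 : compactP (crotC (crotC (crotC cells))) = Rn 3 (compactP cells) :=
    Rn_compact cells h 3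
  have r4 : compactP (crotC (crotC (crotC (crotC cells)))) = Rn 4 (compactP cells) :=
    Rn_compact cells h 4
  rw [r1] at hc1
  rw [r2] at hc2
  rw [r3] at hc3
  rw [r4] at hc4
  have s2 : ∀ (pts : PySem.Set (List Int)) (b : List (List Int)) (k : Nat),
      canonBLoop pts (some b) (k+1)
        = canonBLoop (canonBStep pts).1 (some (min b (canonBStep pts).2)) k := by
    intro pts b k
    show canonBLoop (canonBStep pts).1
      (if (canonBStep pts).2 < b then some (canonBStep pts).2 else some b) k = _
    congr 1
    by_cases hlt : (canonBStep pts).2 < b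
    · rw [if_pos hlt, min_eq_right (le_of_lt hlt)]
    · rw [if_neg hlt, min_eq_left (not_lt.mp hlt)]
  unfold canonB
  have s1 : canonBLoop (PySem.Set.ofList (cells.map (fun p => [p.1, p.2]))) none 4
      = canonBLoop (canonBStep (PySem.Set.ofList (cells.map (fun p => [p.1, p.2])))).1
          (some ((canonBStep (PySem.Set.ofList (cells.map (fun p => [p.1, p.2])))).2)) 3 := rfl
  rw [s1, s2, s2, s2]
  show (some _).getD [] = _
  rw [Option.getD_some]
  rw [hc1, hc2, hc3, hc4]
  simp only [List.foldl_cons, List.foldl_nil]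

lemma min?_canonB (cells : List (Int × Int)) (h : cells ≠ []) :
    ((orbit (compactP cells)).map onesCells).min? = some (canonB cells) := by
  rw [canonB_eq cells h]
  exact List.min?_cons'

lemma canonB_iff_canonP {x y : List (Int × Int)} (hx : x ≠ []) (hy : y ≠ []) :
    canonP x = canonP y ↔ canonB x = canonB y := by
  have hgx : Good (compactP x) := compact_good x hx
  have hgy : Good (compactP y) := compact_good y hy
  constructor
  · intro hpq
    have hmem : compactP x ∈ orbit (compactP y) := (match_iff hgx hgy).mpr hpq
    obtain ⟨k, hk1, hk4, hke⟩ := mem_orbit_iff.mp hmem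
    have hmap : (orbit (compactP x)).map onesCells
        = ((orbit (compactP y)).map onesCells).rotate k := by
      rw [hke, orbit_Rn hgy k hk1 hk4, List.map_rotate]
    have hperm := min?_perm (l₁ := (orbit (compactP x)).map onesCells)
      (l₂ := (orbit (compactP y)).map onesCells)
      (by rw [hmap]; exact List.rotate_perm _ _)
    rw [min?_canonB x hx, min?_canonB y hy] at hperm
    exact Option.some_injective _ hperm
  · intro hbq
    obtain ⟨gx', hgx', hex⟩ := List.mem_map.mp (List.min?_mem (min?_canonB x hx))
    obtain ⟨gy', hgy', hey⟩ := List.mem_map.mp (List.min?_mem (min?_canonB y hy))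
    obtain ⟨j, hj1, hj4, rfl⟩ := mem_orbit_iff.mp hgx'
    obtain ⟨k, hk1, hk4, rfl⟩ := mem_orbit_iff.mp hgy'
    have heq : onesCells (compactP (crotIter j x)) = onesCells (compactP (crotIter k y)) := by
      rw [Rn_compact x hx j, Rn_compact y hy k, hex, hey, hbq]
    have hgeq := onesCells_inj (crotIter_ne hx j) (crotIter_ne hy k) heq
    have hgeq' : Rn j (compactP x) = Rn k (compactP y) := by
      rw [← Rn_compact x hx j, ← Rn_compact y hy k, hgeq]
    show kfun (compactP x) = kfun (compactP y)
    calc kfun (compactP x) = kfun (Rn j (compactP x)) := (kfun_shift hgx j hj1 hj4).symm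
      _ = kfun (Rn k (compactP y)) := by rw [hgeq']
      _ = kfun (compactP y) := kfun_shift hgy k hk1 hk4

lemma ones_canonP (p : List (Int × Int)) (hp : p ≠ []) :
    onesP (canonP p) = onesP (compactP p) := by
  obtain ⟨k, h1, h4, hk⟩ := mem_orbit_iff.mp (kfun_mem (compactP p))
  show onesP (kfun (compactP p)) = _
  rw [hk]
  exact ones_Rn (compact_good p hp) k

lemma canonB_length (x : List (Int × Int)) (hx : x ≠ []) :
    ((canonB x).length : Int) = onesP (canonP x) := by
  have hgx : Good (compactP x) := compact_good x hx
  obtain ⟨g', hg', he⟩ := List.mem_map.mp (List.min?_mem (min?_canonB x hx))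
  obtain ⟨j, hj1, hj4, rfl⟩ := mem_orbit_iff.mp hg'
  rw [← he, length_onesCells _ (good_Rn hgx j).1, ones_Rn hgx j]
  exact (ones_canonP x hx).symm

-- bfs regions are nonempty

lemma foldl_preserve {σ β : Type} (P : σ → Prop) (f : σ → β → σ)
    (h : ∀ s x, P s → P (f s x)) : ∀ (l : List β) (s : σ), P s → P (l.foldl f s) := by
  intro l
  induction l with
  | nil => intro s hs; exact hs
  | cons x l ih => intro s hs; exact ih _ (h s x hs)

lemma bfsWhile_temp_ne (board : List (List Int)) (value row col : Int) :
    ∀ (fuel : Nat) (q : List (Int × Int)) (vis : List (List Bool)) (temp : List (Int × Int)),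
    temp ≠ [] → (bfsWhile board value row col fuel q vis temp).2 ≠ [] := by
  intro fuel
  induction fuel with
  | zero => intro q vis temp ht; exact ht
  | succ fuel ih =>
    intro q vis temp ht
    cases q with
    | nil => exact ht
    | cons xy q' =>
      show (bfsWhile board value row col fuel _ _ _).2 ≠ []
      apply ih
      refine foldl_preserve
        (fun (st : List (Int × Int) × List (List Bool) × List (Int × Int)) => st.2.2 ≠ [])
        _ ?_ _ _ ht
      intro s x hs
      dsimp only
      split
      · simp
      · exact hs

lemma bfsP_ne_nil (board : List (List Int)) (value : Int) :
    ∀ t ∈ bfsP board value, t ≠ [] := by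
  unfold bfsP
  dsimp only
  refine foldl_preserve
    (fun (st : List (List Bool) × List (List (Int × Int))) => ∀ t ∈ st.2, t ≠ [])
    _ ?_ _ _ (by simp)
  intro st i hst
  refine foldl_preserve
    (fun (st : List (List Bool) × List (List (Int × Int))) => ∀ t ∈ st.2, t ≠ [])
    _ ?_ _ _ hst
  intro st' j hst'
  dsimp only
  split
  · intro t ht
    rcases List.mem_append.mp ht with h | h
    · exact hst' t h
    · rw [List.mem_singleton.mp h]
      exact bfsWhile_temp_ne _ _ _ _ _ _ _ _ (by simp)
  · exact hst'

-- A's greedy loop = per-key min-count sum (over canonP keys)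

lemma rotTry_canon {e p : List (Int × Int)} (he : e ≠ []) (hp : p ≠ []) :
    rotTry (compactP e) (compactP p) 4
      = if canonP e = canonP p then some (onesP (compactP p)) else none := by
  rw [rotTry_eq _ (compact_good p hp)]
  by_cases hm : compactP e ∈ orbit (compactP p)
  · rw [if_pos hm, if_pos]
    exact (match_iff (compact_good e he) (compact_good p hp)).mp hm
  · rw [if_neg hm, if_neg]
    intro hk
    exact hm ((match_iff (compact_good e he) (compact_good p hp)).mpr hk)

lemma scanPz_none_iff (ce : List (List Int)) :
    ∀ P : List (List (Int × Int)),
    scanPz ce P = none ↔ ∀ p ∈ P, rotTry ce (compactP p) 4 = none := by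
  intro P
  induction P with
  | nil => simp [scanPz]
  | cons p ps ih =>
    show (match rotTry ce (compactP p) 4 with
      | some c => some (c, p)
      | none => scanPz ce ps) = none ↔ _
    cases hr : rotTry ce (compactP p) 4 with
    | some c =>
      simp only []
      constructor
      · intro hc; cases hc
      · intro hall
        have := hall p List.mem_cons_self
        rw [hr] at this
        cases this
    | none =>
      simp only []
      rw [ih]
      constructor
      · intro hall q hq
        rcases List.mem_cons.mp hq with rfl | hq'
        · exact hr
        · exact hall q hq'
      · intro hall q hq
        exact hall q (List.mem_cons_of_mem _ hq)

lemma scanPz_some (ce : List (List Int)) :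
    ∀ (P : List (List (Int × Int))) (c : Int) (p₀ : List (Int × Int)),
    scanPz ce P = some (c, p₀) →
    ∃ P₁ P₂, P = P₁ ++ p₀ :: P₂ ∧ (∀ q ∈ P₁, rotTry ce (compactP q) 4 = none) ∧
      rotTry ce (compactP p₀) 4 = some c := by
  intro P
  induction P with
  | nil => intro c p₀ hc; cases hc
  | cons p ps ih =>
    intro c p₀ hc
    revert hc
    show (match rotTry ce (compactP p) 4 with
      | some c => some (c, p)
      | none => scanPz ce ps) = some (c, p₀) → _
    cases hr : rotTry ce (compactP p) 4 with
    | some c' =>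
      intro hc
      simp only [Option.some.injEq, Prod.mk.injEq] at hc
      obtain ⟨rfl, rfl⟩ := hc
      exact ⟨[], ps, rfl, by simp, hr⟩
    | none =>
      intro hc
      obtain ⟨P₁, P₂, rfl, hnone, hsome⟩ := ih c p₀ hc
      refine ⟨p :: P₁, P₂, rfl, ?_, hsome⟩
      intro q hq
      rcases List.mem_cons.mp hq with rfl | hq'
      · exact hr
      · exact hnone q hq'

lemma eraseIdx_append_cons {α : Type} (l₁ l₂ : List α) (a : α) :
    (l₁ ++ a :: l₂).eraseIdx l₁.length = l₁ ++ l₂ := by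
  induction l₁ with
  | nil => rfl
  | cons x l₁ ih => simp [ih]

lemma remove?_first {P₁ P₂ : List (List (Int × Int))} {p₀ : List (Int × Int)}
    (hnot : p₀ ∉ P₁) :
    PySem.List.remove? (P₁ ++ p₀ :: P₂) p₀ = some (P₁ ++ P₂) := by
  have hidx : PySem.List.index? (P₁ ++ p₀ :: P₂) p₀ = some P₁.length :=
    (PySem.List.index?_eq_some_iff _ _ _).mpr ⟨P₁, P₂, rfl, rfl, hnot⟩
  rw [PySem.List.index?_eq_idxOf?] at hidx
  unfold PySem.List.remove?
  rw [hidx, Option.map_some, eraseIdx_append_cons]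

def greedyStep (st : Int × List (List (Int × Int))) (empt : List (Int × Int)) :
    Int × List (List (Int × Int)) :=
  let ce := compactP empt
  match scanPz ce st.2 with
  | some cp => (st.1 + cp.1, (PySem.List.remove? st.2 cp.2).getD st.2)
  | none => st

lemma greedyStep_none (st : Int × List (List (Int × Int))) (e : List (Int × Int))
    (h : scanPz (compactP e) st.2 = none) : greedyStep st e = st := by
  unfold greedyStep
  show (match scanPz (compactP e) st.2 with
    | some cp => (st.1 + cp.1, (PySem.List.remove? st.2 cp.2).getD st.2)
    | none => st) = st
  rw [h]

lemma greedyStep_some (st : Int × List (List (Int × Int))) (e : List (Int × Int))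
    (c : Int) (p₀ : List (Int × Int)) (h : scanPz (compactP e) st.2 = some (c, p₀)) :
    greedyStep st e = (st.1 + c, (PySem.List.remove? st.2 p₀).getD st.2) := by
  unfold greedyStep
  show (match scanPz (compactP e) st.2 with
    | some cp => (st.1 + cp.1, (PySem.List.remove? st.2 cp.2).getD st.2)
    | none => st) = _
  rw [h]

set_option maxHeartbeats 1600000 in
lemma greedy :
    ∀ (E P : List (List (Int × Int))), (∀ e ∈ E, e ≠ []) → (∀ p ∈ P, p ≠ []) →
    ∀ acc : Int,
    (E.foldl greedyStep (acc, P)).1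
    = acc + ∑ s ∈ (P.map canonP).toFinset,
        min ((List.count s (E.map canonP) : Int)) ((List.count s (P.map canonP) : Int))
          * onesP s := by
  intro E
  induction E with
  | nil =>
    intro P hE hP acc
    rw [List.foldl_nil, List.map_nil]
    have hz : ∑ s ∈ (P.map canonP).toFinset,
        min ((List.count s ([] : List (List (List Int))) : Int))
          ((List.count s (P.map canonP) : Int)) * onesP s = 0 := by
      apply Finset.sum_eq_zero
      intro s _
      rw [List.count_nil]
      have : min ((0 : Nat) : Int) ((List.count s (P.map canonP) : Int)) = 0 := by
        rw [Nat.cast_zero]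
        exact min_eq_left (Int.natCast_nonneg _)
      rw [this, zero_mul]
    rw [hz, add_zero]
  | cons e E ih =>
    intro P hE hP acc
    have he : e ≠ [] := hE e List.mem_cons_self
    have hE' : ∀ x ∈ E, x ≠ [] := fun x hx => hE x (List.mem_cons_of_mem _ hx)
    rw [List.foldl_cons]
    cases hscan : scanPz (compactP e) P with
    | none =>
      rw [greedyStep_none (acc, P) e hscan, ih P hE' hP acc]
      have hsum : ∀ s ∈ (P.map canonP).toFinset,
          min ((List.count s ((e :: E).map canonP) : Int))
            ((List.count s (P.map canonP) : Int)) * onesP s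
          = min ((List.count s (E.map canonP) : Int))
            ((List.count s (P.map canonP) : Int)) * onesP s := by
        intro s hs
        have hsP : s ∈ P.map canonP := List.mem_toFinset.mp hs
        obtain ⟨p, hpP, rfl⟩ := List.mem_map.mp hsP
        have hne : canonP e ≠ canonP p := by
          have hnone := (scanPz_none_iff (compactP e) P).mp hscan p hpP
          rw [rotTry_canon he (hP p hpP)] at hnone
          intro hc
          rw [if_pos hc] at hnone
          cases hnone
        have hbeq : (canonP e == canonP p) = false := beq_eq_false_iff_ne.mpr hne
        rw [List.map_cons, List.count_cons, hbeq, if_neg Bool.false_ne_true, Nat.add_zero]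
      rw [Finset.sum_congr rfl hsum]
    | some cp =>
      obtain ⟨c, p₀⟩ := cp
      obtain ⟨P₁, P₂, rfl, hnone₁, hsome⟩ := scanPz_some (compactP e) _ c p₀ hscan
      have hp₀ : p₀ ≠ [] := hP p₀ (by simp)
      have hc_eq : c = onesP (compactP p₀) ∧ canonP e = canonP p₀ := by
        rw [rotTry_canon he hp₀] at hsome
        by_cases hk : canonP e = canonP p₀
        · rw [if_pos hk] at hsome
          exact ⟨(Option.some_injective _ hsome).symm, hk⟩
        · rw [if_neg hk] at hsome
          cases hsome
      obtain ⟨rfl, hkey⟩ := hc_eq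
      have hnotin : p₀ ∉ P₁ := by
        intro hmem
        have := hnone₁ p₀ hmem
        rw [this] at hsome
        cases hsome
      rw [greedyStep_some (acc, P₁ ++ p₀ :: P₂) e _ p₀ hscan]
      show ((E.foldl greedyStep (acc + onesP (compactP p₀),
        (PySem.List.remove? (P₁ ++ p₀ :: P₂) p₀).getD (P₁ ++ p₀ :: P₂)))).1 = _
      rw [remove?_first hnotin, Option.getD_some]
      rw [ih (P₁ ++ P₂) hE' (fun q hq => hP q (by
        rcases List.mem_append.mp hq with h | h
        · exact List.mem_append.mpr (Or.inl h)
        · exact List.mem_append.mpr (Or.inr (List.mem_cons_of_mem _ h)))) _]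
      set s₀ := canonP p₀ with hs₀
      have hkey' : canonP e = s₀ := hkey
      set A := E.map canonP with hA
      set B' := (P₁ ++ P₂).map canonP with hB'
      have hBmap : (P₁ ++ p₀ :: P₂).map canonP = P₁.map canonP ++ s₀ :: P₂.map canonP := by
        rw [List.map_append, List.map_cons]
      have hB'map : B' = P₁.map canonP ++ P₂.map canonP := by
        rw [hB', List.map_append]
      have hcntB : ∀ s, List.count s ((P₁ ++ p₀ :: P₂).map canonP)
          = List.count s B' + if s₀ == s then 1 else 0 := by
        intro s
        rw [hBmap, hB'map, List.count_append, List.count_append, List.count_cons]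
        ring
      have hcntA : ∀ s, List.count s ((e :: E).map canonP)
          = List.count s A + if s₀ == s then 1 else 0 := by
        intro s
        rw [List.map_cons, List.count_cons, hkey']
      have hFF' : ((P₁ ++ p₀ :: P₂).map canonP).toFinset = insert s₀ B'.toFinset := by
        ext s
        rw [List.mem_toFinset, Finset.mem_insert, List.mem_toFinset, hBmap, hB'map]
        simp only [List.mem_append, List.mem_cons]
        tauto
      set ones := onesP with hones
      set F' := B'.toFinset with hF'
      have hterm_ne : ∀ s ∈ F'.erase s₀,
          min ((List.count s ((e :: E).map canonP) : Int))
            ((List.count s ((P₁ ++ p₀ :: P₂).map canonP) : Int)) * ones s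
          = min ((List.count s A : Int)) ((List.count s B' : Int)) * ones s := by
        intro s hs
        have hne : s ≠ s₀ := (Finset.mem_erase.mp hs).1
        have hbeq : (s₀ == s) = false := beq_eq_false_iff_ne.mpr (Ne.symm hne)
        rw [hcntA s, hcntB s, hbeq]
        norm_num
      by_cases hmem : s₀ ∈ F'
      · rw [← Finset.add_sum_erase F' _ hmem]
        rw [hFF', ← Finset.add_sum_erase (insert s₀ F') _ (Finset.mem_insert_self s₀ F')]
        rw [Finset.erase_insert_eq_erase]
        rw [Finset.sum_congr rfl hterm_ne]
        have hmin : min ((List.count s₀ ((e :: E).map canonP) : Int))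
            ((List.count s₀ ((P₁ ++ p₀ :: P₂).map canonP) : Int)) * ones s₀
            = min ((List.count s₀ A : Int)) ((List.count s₀ B' : Int)) * ones s₀ + ones s₀ := by
          rw [hcntA s₀, hcntB s₀, beq_self_eq_true, if_pos rfl]
          push_cast
          have : min ((List.count s₀ A : Int) + 1) ((List.count s₀ B' : Int) + 1)
              = min ((List.count s₀ A : Int)) ((List.count s₀ B' : Int)) + 1 := by omega
          rw [this]
          ring
        rw [hmin]
        have hones₀ : ones s₀ = onesP (compactP p₀) := by
          rw [hones, hs₀]
          exact ones_canonP p₀ hp₀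
        rw [hones₀]
        ring
      · have hcnt0 : List.count s₀ B' = 0 := by
          rw [List.count_eq_zero]
          intro hmem'
          exact hmem (List.mem_toFinset.mpr hmem')
        rw [hFF', ← Finset.add_sum_erase (insert s₀ F') _ (Finset.mem_insert_self s₀ F')]
        rw [Finset.erase_insert_eq_erase, Finset.erase_eq_self.mpr hmem]
        have hterm_ne' : ∀ s ∈ F',
            min ((List.count s ((e :: E).map canonP) : Int))
              ((List.count s ((P₁ ++ p₀ :: P₂).map canonP) : Int)) * ones s
            = min ((List.count s A : Int)) ((List.count s B' : Int)) * ones s := by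
          intro s hs
          have hne : s ≠ s₀ := fun hc => hmem (hc ▸ hs)
          have hbeq : (s₀ == s) = false := beq_eq_false_iff_ne.mpr (Ne.symm hne)
          rw [hcntA s, hcntB s, hbeq]
          norm_num
        rw [Finset.sum_congr rfl hterm_ne']
        have hmin : min ((List.count s₀ ((e :: E).map canonP) : Int))
            ((List.count s₀ ((P₁ ++ p₀ :: P₂).map canonP) : Int)) * ones s₀ = ones s₀ := by
          rw [hcntA s₀, hcntB s₀, hcnt0, beq_self_eq_true, if_pos rfl]
          push_cast
          have h1 : min ((List.count s₀ A : Int) + 1) 1 = 1 := by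
            have := Int.natCast_nonneg (List.count s₀ A)
            omega
          rw [h1, one_mul]
        rw [hmin]
        have hones₀ : ones s₀ = onesP (compactP p₀) := by
          rw [hones, hs₀]
          exact ones_canonP p₀ hp₀
        rw [hones₀]
        ring

-- the counter fold of B = per-key min-count sum (generic weight)

lemma counter_sum (KE KP : List (List (List Int))) (W : List (List Int) → Int) :
    (PySem.Dict.counter KP).items.foldl
      (fun acc kc => acc + min ((PySem.Dict.counter KE).getD kc.1 0) kc.2 * W kc.1) 0
    = ∑ s ∈ KP.toFinset,
        min ((List.count s KE : Int)) ((List.count s KP : Int)) * W s := by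
  rw [PySem.Dict.items_counter]
  rw [PySem.List.foldl_add
    (g := fun kc : (List (List Int)) × Int =>
      min ((PySem.Dict.counter KE).getD kc.1 0) kc.2 * W kc.1)]
  rw [zero_add, List.map_map]
  have hfun : ∀ k ∈ PySem.Set.ofList KP,
      ((fun kc : (List (List Int)) × Int =>
          min ((PySem.Dict.counter KE).getD kc.1 0) kc.2 * W kc.1) ∘
        (fun k => (k, (List.count k KP : Int)))) k
      = min ((List.count k KE : Int)) ((List.count k KP : Int)) * W k := by
    intro k _
    show min ((PySem.Dict.counter KE).getD k 0) ((List.count k KP : Int)) * W k = _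
    rw [PySem.Dict.getD_counter]
  rw [List.map_congr_left hfun]
  have hnd : (PySem.Set.ofList KP).Nodup := PySem.Set.nodup_ofList KP
  have hset : (PySem.Set.ofList KP).toFinset = KP.toFinset := by
    ext s
    rw [List.mem_toFinset, List.mem_toFinset]
    exact PySem.Set.mem_ofList (xs := KP) (y := s)
  rw [← List.sum_toFinset _ hnd, hset]

-- regrouping: the per-key min-count sum only depends on the key-equality relation

def occAux {α : Type} (f : α → List (List Int)) (W : List (List Int) → Int)
    (EF : List (List (List Int))) : List α → List (List (List Int)) → Int
  | [], _ => 0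
  | p :: ps, seen =>
    (if seen.count (f p) < EF.count (f p) then W (f p) else 0)
      + occAux f W EF ps (seen ++ [f p])

lemma occAux_append {α : Type} (f : α → List (List Int)) (W : List (List Int) → Int)
    (EF : List (List (List Int))) (p : α) :
    ∀ (P : List α) (seen : List (List (List Int))),
    occAux f W EF (P ++ [p]) seen
      = occAux f W EF P seen
        + (if (seen ++ P.map f).count (f p) < EF.count (f p) then W (f p) else 0) := by
  intro P
  induction P with
  | nil =>
    intro seen
    simp [occAux]
  | cons q P ih =>
    intro seen
    simp only [List.cons_append, occAux, List.map_cons]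
    rw [ih (seen ++ [f q])]
    have hl : (seen ++ [f q]) ++ P.map f = seen ++ (f q :: P.map f) := by
      rw [List.append_assoc]
      rfl
    rw [hl]
    ring

lemma occAux_sum {α : Type} (f : α → List (List Int)) (W : List (List Int) → Int)
    (E : List α) : ∀ P : List α,
    ∑ s ∈ (P.map f).toFinset,
        min ((List.count s (E.map f) : Int)) ((List.count s (P.map f) : Int)) * W s
      = occAux f W (E.map f) P [] := by
  intro P
  induction P using List.reverseRecOn with
  | nil => simp [occAux]
  | append_singleton P p ih =>
    rw [occAux_append, ← ih]
    simp only [List.nil_append, List.map_append, List.map_cons, List.map_nil]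
    have hcnt : ∀ s, List.count s (P.map f ++ [f p])
        = List.count s (P.map f) + if f p == s then 1 else 0 := by
      intro s
      simp [List.count_append, List.count_cons]
    have hTF : (P.map f ++ [f p]).toFinset = insert (f p) (P.map f).toFinset := by
      ext s
      simp only [List.mem_toFinset, List.mem_append, List.mem_singleton, Finset.mem_insert]
      tauto
    rw [hTF]
    by_cases hmem : f p ∈ (P.map f).toFinset
    · rw [Finset.insert_eq_self.mpr hmem]
      rw [← Finset.add_sum_erase _ _ hmem, ← Finset.add_sum_erase _
        (fun s => min ((List.count s (E.map f) : Int)) ((List.count s (P.map f) : Int)) * W s)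
        hmem]
      have hrest : ∀ s ∈ (P.map f).toFinset.erase (f p),
          min ((List.count s (E.map f) : Int)) ((List.count s (P.map f ++ [f p]) : Int)) * W s
            = min ((List.count s (E.map f) : Int)) ((List.count s (P.map f) : Int)) * W s := by
        intro s hs
        have hne : (f p == s) = false :=
          beq_eq_false_iff_ne.mpr (Ne.symm (Finset.mem_erase.mp hs).1)
        rw [hcnt s, hne]
        norm_num
      rw [Finset.sum_congr rfl hrest]
      have hkey : min ((List.count (f p) (E.map f) : Int))
            ((List.count (f p) (P.map f ++ [f p]) : Int)) * W (f p)
          = min ((List.count (f p) (E.map f) : Int)) ((List.count (f p) (P.map f) : Int))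
              * W (f p)
            + (if List.count (f p) (P.map f) < List.count (f p) (E.map f)
                then W (f p) else 0) := by
        rw [hcnt (f p)]
        simp only [beq_self_eq_true, if_true]
        by_cases hlt : List.count (f p) (P.map f) < List.count (f p) (E.map f)
        · rw [if_pos hlt]
          have hmin : min ((List.count (f p) (E.map f) : Int))
                (((List.count (f p) (P.map f) + 1 : Nat) : Int))
              = min ((List.count (f p) (E.map f) : Int))
                  ((List.count (f p) (P.map f) : Int)) + 1 := by
            have h1 : ((List.count (f p) (P.map f) : Nat) : Int)
                < ((List.count (f p) (E.map f) : Nat) : Int) := by exact_mod_cast hlt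
            push_cast
            omega
          push_cast at hmin ⊢
          rw [hmin]
          ring
        · rw [if_neg hlt]
          have h1 : ((List.count (f p) (E.map f) : Nat) : Int)
              ≤ ((List.count (f p) (P.map f) : Nat) : Int) := by
            exact_mod_cast Nat.le_of_not_lt hlt
          have hmin : min ((List.count (f p) (E.map f) : Int))
                (((List.count (f p) (P.map f) + 1 : Nat) : Int))
              = min ((List.count (f p) (E.map f) : Int))
                  ((List.count (f p) (P.map f) : Int)) := by
            push_cast
            omega
          push_cast at hmin ⊢
          rw [hmin]
          ring
      rw [hkey]
      ring
    · rw [Finset.sum_insert hmem]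
      have hcnt0 : List.count (f p) (P.map f) = 0 := by
        rw [List.count_eq_zero]
        intro hc
        exact hmem (List.mem_toFinset.mpr hc)
      have hrest : ∀ s ∈ (P.map f).toFinset,
          min ((List.count s (E.map f) : Int)) ((List.count s (P.map f ++ [f p]) : Int)) * W s
            = min ((List.count s (E.map f) : Int)) ((List.count s (P.map f) : Int)) * W s := by
        intro s hs
        have hne : (f p == s) = false :=
          beq_eq_false_iff_ne.mpr (fun hc => hmem (hc ▸ hs))
        rw [hcnt s, hne]
        norm_num
      rw [Finset.sum_congr rfl hrest]
      have hterm : min ((List.count (f p) (E.map f) : Int))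
            ((List.count (f p) (P.map f ++ [f p]) : Int)) * W (f p)
          = (if List.count (f p) (P.map f) < List.count (f p) (E.map f)
              then W (f p) else 0) := by
        rw [hcnt (f p), hcnt0]
        simp only [beq_self_eq_true, if_true]
        by_cases hlt : (0 : Nat) < List.count (f p) (E.map f)
        · rw [if_pos (by omega)]
          have hmin : min ((List.count (f p) (E.map f) : Int)) (((0 + 1 : Nat) : Int)) = 1 := by
            have h1 : (1 : Int) ≤ ((List.count (f p) (E.map f) : Nat) : Int) := by
              exact_mod_cast hlt
            push_cast
            omega
          push_cast at hmin ⊢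
          rw [hmin, one_mul]
        · rw [if_neg (by omega)]
          have h0 : List.count (f p) (E.map f) = 0 := by omega
          rw [h0]
          norm_num
      rw [hterm]
      ring

lemma occAux_congr {α : Type} (f g : α → List (List Int))
    (W1 W2 : List (List Int) → Int) (E P : List α)
    (hiff : ∀ x ∈ E ++ P, ∀ y ∈ E ++ P, f x = f y ↔ g x = g y)
    (hW : ∀ p ∈ P, W1 (f p) = W2 (g p)) :
    occAux f W1 (E.map f) P [] = occAux g W2 (E.map g) P [] := by
  have hcount : ∀ (l : List α) (p : α), (∀ x ∈ l, x ∈ E ++ P) → p ∈ E ++ P →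
      (l.map f).count (f p) = (l.map g).count (g p) := by
    intro l p hl hp
    induction l with
    | nil => rfl
    | cons q l ihl =>
      have hq : q ∈ E ++ P := hl q List.mem_cons_self
      simp only [List.map_cons, List.count_cons]
      rw [ihl (fun x hx => hl x (List.mem_cons_of_mem _ hx))]
      congr 1
      by_cases he : f q = f p
      · rw [if_pos (by simpa using he), if_pos (by simpa using (hiff q hq p hp).mp he)]
      · rw [if_neg (by simpa using he),
          if_neg (by simpa using (fun hc => he ((hiff q hq p hp).mpr hc)))]
  have main : ∀ (P' : List α), (∀ x ∈ P', x ∈ P) →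
      ∀ (pre : List α), (∀ x ∈ pre, x ∈ E ++ P) →
      occAux f W1 (E.map f) P' (pre.map f) = occAux g W2 (E.map g) P' (pre.map g) := by
    intro P'
    induction P' with
    | nil => intro _ pre _; rfl
    | cons p P' ihp =>
      intro hinP pre hpre
      have hp : p ∈ E ++ P := List.mem_append.mpr (Or.inr (hinP p List.mem_cons_self))
      simp only [occAux]
      have h1 : (pre.map f).count (f p) = (pre.map g).count (g p) := hcount pre p hpre hp
      have h2 : ((E.map f).count (f p)) = ((E.map g).count (g p)) :=
        hcount E p (fun x hx => List.mem_append.mpr (Or.inl hx)) hp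
      rw [h1, h2, hW p (hinP p List.mem_cons_self)]
      have hpre' : ∀ x ∈ pre ++ [p], x ∈ E ++ P := by
        intro x hx
        rcases List.mem_append.mp hx with h | h
        · exact hpre x h
        · rw [List.mem_singleton.mp h]
          exact hp
      have := ihp (fun q hq => hinP q (List.mem_cons_of_mem _ hq)) (pre ++ [p]) hpre'
      simp only [List.map_append, List.map_cons, List.map_nil] at this
      rw [this]
  exact main P (fun p hp => hp) [] (by simp)

-- assembly

theorem solution_eq_alt (gb tb : List (List Int)) : solution gb tb = solution_alt gb tb := by
  have hE := bfsP_ne_nil gb 0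
  have hP := bfsP_ne_nil tb 1
  have h1 : solution gb tb = ((bfsP gb 0).foldl greedyStep (0, bfsP tb 1)).1 := rfl
  have h2 : solution_alt gb tb
      = (PySem.Dict.counter ((bfsP tb 1).map canonB)).items.foldl
        (fun acc kc => acc + min ((PySem.Dict.counter ((bfsP gb 0).map canonB)).getD kc.1 0) kc.2
          * PySem.List.len kc.1) 0 := rfl
  rw [h1, h2, greedy _ _ hE hP 0, zero_add,
    counter_sum ((bfsP gb 0).map canonB) ((bfsP tb 1).map canonB)
      (fun k => PySem.List.len k),
    occAux_sum canonP onesP (bfsP gb 0) (bfsP tb 1),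
    occAux_sum canonB (fun k => PySem.List.len k) (bfsP gb 0) (bfsP tb 1)]
  apply occAux_congr
  · intro x hx y hy
    have hx' : x ≠ [] := by
      rcases List.mem_append.mp hx with h | h
      · exact hE x h
      · exact hP x h
    have hy' : y ≠ [] := by
      rcases List.mem_append.mp hy with h | h
      · exact hE y h
      · exact hP y h
    exact canonB_iff_canonP hx' hy'
  · intro p hp
    have hp' : p ≠ [] := hP p hp
    show onesP (canonP p) = PySem.List.len (canonB p)
    rw [PySem.List.len_eq]
    exact (canonB_length p hp').symm

-- ===== VERDICT (by name: the statement is the Claim_ definition above) =====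
theorem solution_spec : Claim_equal_solution := by
  intro game_board table _ _
  exact solution_eq_alt game_board table
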